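-- pv_equiv track=rewrite | github.com/papikohehe/qacheckwow | app.py | get_highlighted_diff
-- ===== SOURCE A (Python) =====
-- from difflib import SequenceMatcher
--
-- def get_highlighted_diff(text1, text2):
--     """
--     Compares two strings and returns an HTML string with the parts of text1
--     that are not in text2 highlighted in yellow.
--     """
--     matcher = SequenceMatcher(None, text2, text1, autojunk=False)
--
--     opcodes = matcher.get_opcodes()
--
--     highlighted_text = []
--     for tag, i1, i2, j1, j2 in opcodes:
--         if tag == 'equal':
--             highlighted_text.append(text1[j1:j2])
--         elif tag == 'insert':
--             highlighted_text.append(f'<span style="background-color: #fdd835;">{text1[j1:j2]}</span>')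
--         elif tag == 'replace':
--             highlighted_text.append(f'<span style="background-color: #fdd835;">{text1[j1:j2]}</span>')
--
--     return "".join(highlighted_text)
-- ===== SOURCE B (Python) =====
-- def _longest_match(a, b, alo, ahi, blo, bhi):
--     """Longest matching block of a[alo:ahi] / b[blo:bhi] via a rolling DP row:
--     cur[idx] = length of the common run ending at a[i], b[blo+idx]; the best is
--     kept with the earliest endpoint (strict improvement only), which yields the
--     leftmost-in-a, then leftmost-in-b longest block."""
--     besti, bestj, bestsize = alo, blo, 0
--     width = bhi - blo
--     prev = [0] * width
--     for i in range(alo, ahi):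
--         cur = [0] * width
--         for idx in range(width):
--             if a[i] == b[blo + idx]:
--                 k = (prev[idx - 1] if idx > 0 else 0) + 1
--                 cur[idx] = k
--                 if k > bestsize:
--                     besti, bestj, bestsize = i - k + 1, blo + idx - k + 1, k
--         prev = cur
--     return besti, bestj, bestsize
--
--
-- def _render(a, b, alo, ahi, blo, bhi, parts):
--     """In-order recursion: render b[blo:bhi] left to right — recurse before the
--     block, keep the block verbatim, recurse after it; a region with no match is
--     one highlighted span (if it covers any of b)."""
--     i, j, k = _longest_match(a, b, alo, ahi, blo, bhi)
--     if k == 0: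
--         if blo < bhi:
--             parts.append(f'<span style="background-color: #fdd835;">{b[blo:bhi]}</span>')
--     else:
--         _render(a, b, alo, i, blo, j, parts)
--         parts.append(b[j:j + k])
--         _render(a, b, i + k, ahi, j + k, bhi, parts)
--
--
-- def get_highlighted_diff(text1, text2):
--     """
--     Compares two strings and returns an HTML string with the parts of text1
--     that are not in text2 highlighted in yellow.
--     """
--     parts = []
--     _render(text2, text1, 0, len(text2), 0, len(text1), parts)
--     return "".join(parts)
-- ===== Notes on version B (the rewrite author's own statement) =====
-- stated objective: alternative
-- what changed: B replaces difflib's whole machinery (b2j position index, j2len hash-chain dicts, run-extension whiles, explicit work stack, sort, block collapse, opcode tagging) with a dense rolling-row DP for each longest match, an in-order divide-and-conquer recursion, and direct recursive rendering of each matchless region as one highlighted span.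
import Mathlib
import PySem

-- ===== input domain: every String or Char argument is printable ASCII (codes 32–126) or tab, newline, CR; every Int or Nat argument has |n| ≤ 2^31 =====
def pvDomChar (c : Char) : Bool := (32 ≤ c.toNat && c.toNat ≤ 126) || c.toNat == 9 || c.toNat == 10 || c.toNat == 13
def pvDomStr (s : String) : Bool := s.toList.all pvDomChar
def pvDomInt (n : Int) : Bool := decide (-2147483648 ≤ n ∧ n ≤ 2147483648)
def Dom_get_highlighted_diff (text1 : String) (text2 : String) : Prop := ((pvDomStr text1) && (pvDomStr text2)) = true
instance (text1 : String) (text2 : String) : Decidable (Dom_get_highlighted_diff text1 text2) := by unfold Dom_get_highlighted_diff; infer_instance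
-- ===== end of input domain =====

-- B replaces difflib's machinery (b2j index, j2len hash chains, extension whiles, work stack,
-- sort, collapse, opcode tags) by a rolling-row DP longest match, in-order recursion and direct
-- recursive rendering; return values are proved equal (no side effects involved).

-- the highlight markup literal, shared by both Pythons
def pvHlPre : List Char := "<span style=\"background-color: #fdd835;\">".toList
def pvHlSuf : List Char := "</span>".toList
def pvWrap (s : List Char) : List Char := pvHlPre ++ s ++ pvHlSuf

-- ===== PORT A =====
-- A calls difflib.SequenceMatcher(None, a, b, autojunk=False).get_opcodes(); the library code is
-- ported by hand, step for step.  Strings are handled as List Char (PySem.Chars convention).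

-- __chain_b: b2j = {}; for i, elt in enumerate(b): b2j.setdefault(elt, []).append(i)
-- (isjunk is None and autojunk=False, so the junk/popular purge loops do nothing and are omitted)
def pvB2j (b : List Char) : PySem.Dict Char (List Int) :=
  (PySem.List.enumerate b).foldl
    (fun d p => d.insert p.2 (d.getD p.2 [] ++ [(p.1 : Int)])) PySem.Dict.empty

-- inner loop of find_longest_match: for j in b2j.get(a[i], nothing): … (continue / break / update)
def pvFlmInner (i blo bhi : Int) (j2len : PySem.Dict Int Int) :
    List Int → PySem.Dict Int Int → Int × Int × Int → PySem.Dict Int Int × (Int × Int × Int)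
  | [], newj2len, best => (newj2len, best)
  | j :: js, newj2len, best =>
    if j < blo then pvFlmInner i blo bhi j2len js newj2len best          -- continue
    else if bhi ≤ j then (newj2len, best)                                -- break
    else
      let k := j2len.getD (j - 1) 0 + 1                                  -- k = newj2len[j] = j2len.get(j-1,0)+1
      let newj2len' := newj2len.insert j k
      let best' := if best.2.2 < k then (i - k + 1, j - k + 1, k) else best
      pvFlmInner i blo bhi j2len js newj2len' best'

-- core of find_longest_match: for i in range(alo, ahi): …
-- a[i] is in range for every i the loop produces, so the .getD ' ' default is never used (exact).
def pvFlmCore (a : List Char) (b2j : PySem.Dict Char (List Int)) (alo ahi blo bhi : Int) :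
    Int × Int × Int :=
  ((PySem.List.pyRange alo ahi 1).foldl
    (fun (st : PySem.Dict Int Int × (Int × Int × Int)) i =>
      pvFlmInner i blo bhi st.1 (b2j.getD ((PySem.List.pyGet? a i).getD ' ') []) PySem.Dict.empty st.2)
    (PySem.Dict.empty, (alo, blo, 0))).2

-- while besti > alo and bestj > blo and a[besti-1] == b[bestj-1]: extend left
-- (the junk-extension whiles of difflib never fire: isbjunk is constantly False with no junk)
def pvExtendL (a b : List Char) (alo blo besti bestj bestsize : Int) : Int × Int × Int :=
  if h : alo < besti ∧ blo < bestj ∧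
      PySem.List.pyGet? a (besti - 1) = PySem.List.pyGet? b (bestj - 1) then
    pvExtendL a b alo blo (besti - 1) (bestj - 1) (bestsize + 1)
  else (besti, bestj, bestsize)
termination_by (besti - alo).toNat
decreasing_by omega

-- while besti+bestsize < ahi and bestj+bestsize < bhi and a[besti+bestsize] == b[bestj+bestsize]: extend right
def pvExtendR (a b : List Char) (ahi bhi : Int) (besti bestj bestsize : Int) : Int × Int × Int :=
  if h : besti + bestsize < ahi ∧ bestj + bestsize < bhi ∧
      PySem.List.pyGet? a (besti + bestsize) = PySem.List.pyGet? b (bestj + bestsize) then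
    pvExtendR a b ahi bhi besti bestj (bestsize + 1)
  else (besti, bestj, bestsize)
termination_by (ahi - besti - bestsize).toNat
decreasing_by omega

def pvFlm (a b : List Char) (b2j : PySem.Dict Char (List Int)) (alo ahi blo bhi : Int) :
    Int × Int × Int :=
  let c := pvFlmCore a b2j alo ahi blo bhi
  let l := pvExtendL a b alo blo c.1 c.2.1 c.2.2
  pvExtendR a b ahi bhi l.1 l.2.1 l.2.2

-- while queue: … — the Python stack (append/pop at the end) is the head of the Lean list; the
-- second append lands on top, matching pop order.  The fuel argument only makes the recursion
-- structural: each iteration pops one entry and a run creates at most 1 + 2·len(a) entries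
-- (every pushed pair comes from a match consuming ≥ 1 element of a), so the initial fuel
-- 2·len(a)+2 is never exhausted.
def pvGmbQueue (a b : List Char) (b2j : PySem.Dict Char (List Int)) :
    Nat → List (Int × Int × Int × Int) → List (Int × Int × Int) → List (Int × Int × Int)
  | _, [], acc => acc
  | 0, _, acc => acc
  | fuel + 1, (alo, ahi, blo, bhi) :: rest, acc =>
    let m := pvFlm a b b2j alo ahi blo bhi
    let i := m.1; let j := m.2.1; let k := m.2.2
    if k ≠ 0 then
      let rest1 := if alo < i ∧ blo < j then (alo, i, blo, j) :: rest else rest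
      let rest2 := if i + k < ahi ∧ j + k < bhi then (i + k, ahi, j + k, bhi) :: rest1 else rest1
      pvGmbQueue a b b2j fuel rest2 (acc ++ [(i, j, k)])
    else pvGmbQueue a b b2j fuel rest acc

-- the collapse loop of get_matching_blocks
def pvCollapse : List (Int × Int × Int) → Int → Int → Int → List (Int × Int × Int) → List (Int × Int × Int)
  | [], i1, j1, k1, acc => if k1 ≠ 0 then acc ++ [(i1, j1, k1)] else acc
  | (i2, j2, k2) :: rest, i1, j1, k1, acc =>
    if i1 + k1 = i2 ∧ j1 + k1 = j2 then pvCollapse rest i1 j1 (k1 + k2) acc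
    else if k1 ≠ 0 then pvCollapse rest i2 j2 k2 (acc ++ [(i1, j1, k1)])
    else pvCollapse rest i2 j2 k2 acc

-- matching_blocks.sort(): lexicographic tuple sort; the first components of distinct collected
-- matches are distinct (matches cover disjoint stretches of a), so sorting by the first two
-- components is Python's tuple sort here.
def pvMatchingBlocks (a b : List Char) : List (Int × Int × Int) :=
  let b2j := pvB2j b
  let blocks := pvGmbQueue a b b2j (2 * a.length + 2)
      [((0 : Int), (a.length : Int), (0 : Int), (b.length : Int))] []
  let sorted := PySem.List.sorted2 blocks (fun t => t.1) (fun t => t.2.1)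
  pvCollapse sorted 0 0 0 [] ++ [((a.length : Int), (b.length : Int), 0)]

-- get_opcodes(): i = j = 0; for ai, bj, size in blocks: …
def pvOpcodes : Int → Int → List (Int × Int × Int) → List (String × Int × Int × Int × Int)
  | _, _, [] => []
  | i, j, (ai, bj, size) :: rest =>
    let tag : String :=
      if i < ai ∧ j < bj then "replace"
      else if i < ai then "delete"
      else if j < bj then "insert"
      else ""
    (if tag ≠ "" then [(tag, i, ai, j, bj)] else []) ++
      (if size ≠ 0 then [("equal", ai, ai + size, bj, bj + size)] else []) ++
      pvOpcodes (ai + size) (bj + size) rest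

-- A's loop: append a piece per opcode ('delete' appends nothing), then "".join
def pvRenderA (t1 : List Char) : List (String × Int × Int × Int × Int) → List (List Char)
  | [] => []
  | (tag, _, _, j1, j2) :: rest =>
    (if tag = "equal" then [PySem.List.slice t1 (some j1) (some j2)]
     else if tag = "insert" then [pvWrap (PySem.List.slice t1 (some j1) (some j2))]
     else if tag = "replace" then [pvWrap (PySem.List.slice t1 (some j1) (some j2))]
     else []) ++ pvRenderA t1 rest

def get_highlighted_diff (text1 : String) (text2 : String) : String :=
  String.ofList (pvRenderA text1.toList
    (pvOpcodes 0 0 (pvMatchingBlocks text2.toList text1.toList))).flatten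

-- ===== PORT B =====
-- Source B's _longest_match: rolling DP row.  Inner loop 'for idx in range(width): …'; the loop
-- indices are always in range, so 'a[i] == b[blo+idx]' and 'prev[idx-1]' are ported with
-- pyGetD (default never used — exact), and 'cur[idx] = k' with List.set.
def pvLMStep (a b : List Char) (i blo : Int) (prev : List Int)
    (st : List Int × (Int × Int × Int)) (idx : Int) : List Int × (Int × Int × Int) :=
  if PySem.List.pyGetD a i ' ' = PySem.List.pyGetD b (blo + idx) ' ' then
    let k := (if 0 < idx then PySem.List.pyGetD prev (idx - 1) 0 else 0) + 1
    (st.1.set idx.toNat k,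
     if st.2.2.2 < k then (i - k + 1, blo + idx - k + 1, k) else st.2)
  else st

def pvLMRow (a b : List Char) (i blo width : Int) (prev : List Int) (best : Int × Int × Int) :
    List Int × (Int × Int × Int) :=
  (PySem.List.pyRange 0 width 1).foldl (pvLMStep a b i blo prev)
    (List.replicate width.toNat 0, best)

-- outer loop 'for i in range(alo, ahi): … prev = cur'
def pvLM (a b : List Char) (alo ahi blo bhi : Int) : Int × Int × Int :=
  ((PySem.List.pyRange alo ahi 1).foldl
    (fun (st : List Int × (Int × Int × Int)) i => pvLMRow a b i blo (bhi - blo) st.1 st.2)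
    (List.replicate (bhi - blo).toNat 0, (alo, blo, 0))).2

-- Source B's _render: in-order recursion accumulating parts.  The fuel only makes the recursion
-- structural: every recursive call strictly shrinks ahi-alo (a found block has k ≥ 1), so the
-- initial fuel len(a)+1 is never exhausted.
def pvRenderB (a b : List Char) : Nat → Int → Int → Int → Int → List (List Char) → List (List Char)
  | 0, _, _, _, _, parts => parts
  | fuel + 1, alo, ahi, blo, bhi, parts =>
    let m := pvLM a b alo ahi blo bhi
    let i := m.1; let j := m.2.1; let k := m.2.2
    if k = 0 then
      if blo < bhi then parts ++ [pvWrap (PySem.List.slice b (some blo) (some bhi))] else parts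
    else
      let parts1 := pvRenderB a b fuel alo i blo j parts
      let parts2 := parts1 ++ [PySem.List.slice b (some j) (some (j + k))]
      pvRenderB a b fuel (i + k) ahi (j + k) bhi parts2

def get_highlighted_diff_alt (text1 : String) (text2 : String) : String :=
  String.ofList (pvRenderB text2.toList text1.toList (text2.toList.length + 1)
    0 (text2.toList.length : Int) 0 (text1.toList.length : Int) []).flatten

-- ===== PRECONDITION & SPEC =====
def Spec_get_highlighted_diff (text1 : String) (text2 : String) (out : String) : Prop := out = get_highlighted_diff_alt text1 text2
instance (text1 : String) (text2 : String) (out : String) : Decidable (Spec_get_highlighted_diff text1 text2 out) := by unfold Spec_get_highlighted_diff; infer_instance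

-- ===== CLAIM (what is proved, stated in full; the proofs are below) =====
def Claim_equal_get_highlighted_diff : Prop := ∀ (text1 : String) (text2 : String), Dom_get_highlighted_diff text1 text2 → Spec_get_highlighted_diff text1 text2 (get_highlighted_diff text1 text2)

-- ===== LEMMAS AND PROOFS =====

-- ---------- the run-length function m: length of the common run ending at a[i], b[j],
-- ---------- clipped to the window [alo,ahi) × [blo,bhi); 0 off a match or out of the window
def pvM (a b : List Char) (alo ahi blo bhi : Int) (i j : Int) : Int :=
  if h : alo ≤ i ∧ i < ahi ∧ blo ≤ j ∧ j < bhi ∧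
      PySem.List.pyGetD a i ' ' = PySem.List.pyGetD b j ' ' then
    pvM a b alo ahi blo bhi (i - 1) (j - 1) + 1
  else 0
termination_by (i - alo + 1).toNat
decreasing_by omega

lemma pvM_nonneg (a b : List Char) (alo ahi blo bhi i j : Int) :
    0 ≤ pvM a b alo ahi blo bhi i j := by
  rw [pvM]
  split
  · rename_i h
    have hrec := pvM_nonneg a b alo ahi blo bhi (i - 1) (j - 1)
    omega
  · omega
termination_by (i - alo + 1).toNat
decreasing_by omega

lemma pvM_zero (a b : List Char) (alo ahi blo bhi i j : Int)
    (h : ¬ (alo ≤ i ∧ i < ahi ∧ blo ≤ j ∧ j < bhi ∧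
      PySem.List.pyGetD a i ' ' = PySem.List.pyGetD b j ' ')) :
    pvM a b alo ahi blo bhi i j = 0 := by
  rw [pvM, dif_neg h]

lemma pvM_succ (a b : List Char) (alo ahi blo bhi i j : Int)
    (h : alo ≤ i ∧ i < ahi ∧ blo ≤ j ∧ j < bhi ∧
      PySem.List.pyGetD a i ' ' = PySem.List.pyGetD b j ' ') :
    pvM a b alo ahi blo bhi i j = pvM a b alo ahi blo bhi (i - 1) (j - 1) + 1 := by
  conv_lhs => rw [pvM]
  rw [dif_pos h]

lemma pvM_pos (a b : List Char) (alo ahi blo bhi i j : Int)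
    (h : 0 < pvM a b alo ahi blo bhi i j) :
    alo ≤ i ∧ i < ahi ∧ blo ≤ j ∧ j < bhi ∧
      PySem.List.pyGetD a i ' ' = PySem.List.pyGetD b j ' ' := by
  by_contra hc
  rw [pvM_zero a b alo ahi blo bhi i j hc] at h
  exact absurd h (by omega)

lemma pvM_le (a b : List Char) (alo ahi blo bhi i j : Int)
    (h : 0 < pvM a b alo ahi blo bhi i j) :
    pvM a b alo ahi blo bhi i j ≤ i - alo + 1 ∧ pvM a b alo ahi blo bhi i j ≤ j - blo + 1 := by
  have h5 := pvM_pos a b alo ahi blo bhi i j h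
  have hs := pvM_succ a b alo ahi blo bhi i j h5
  by_cases h0 : 0 < pvM a b alo ahi blo bhi (i - 1) (j - 1)
  · have ih := pvM_le a b alo ahi blo bhi (i - 1) (j - 1) h0
    omega
  · have hz := pvM_nonneg a b alo ahi blo bhi (i - 1) (j - 1)
    omega
termination_by (i - alo + 1).toNat
decreasing_by omega

-- stepping down the run: for t < m(i,j), m(i-t, j-t) = m(i,j) - t
lemma pvM_sub (a b : List Char) (alo ahi blo bhi : Int) (t : Nat) :
    ∀ i j, (t : Int) < pvM a b alo ahi blo bhi i j →
      pvM a b alo ahi blo bhi (i - t) (j - t) = pvM a b alo ahi blo bhi i j - t := by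
  induction t with
  | zero => intro i j _; simp
  | succ t ih =>
    intro i j h
    have hpos : 0 < pvM a b alo ahi blo bhi i j := by
      have : (0 : Int) ≤ ((t + 1 : Nat) : Int) := by positivity
      omega
    have h5 := pvM_pos a b alo ahi blo bhi i j hpos
    have hs := pvM_succ a b alo ahi blo bhi i j h5
    have ih' := ih (i - 1) (j - 1) (by push_cast at h ⊢; omega)
    have e1 : i - ((t + 1 : Nat) : Int) = (i - 1) - (t : Nat) := by push_cast; ring
    have e2 : j - ((t + 1 : Nat) : Int) = (j - 1) - (t : Nat) := by push_cast; ring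
    rw [e1, e2, ih', hs]
    push_cast; ring

-- ---------- reference best: fold the strict-improvement update over matched columns, rows asc
def pvCols (a b : List Char) (i blo bhi : Int) : List Int :=
  (PySem.List.pyRange blo bhi 1).filter
    (fun j => PySem.List.pyGetD a i ' ' == PySem.List.pyGetD b j ' ')

def pvUpd (a b : List Char) (alo ahi blo bhi i : Int) (best : Int × Int × Int) (j : Int) :
    Int × Int × Int :=
  let k := pvM a b alo ahi blo bhi i j
  if best.2.2 < k then (i - k + 1, j - k + 1, k) else best

def pvBestFrom (a b : List Char) (alo ahi blo bhi r : Int) (best : Int × Int × Int) :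
    Int × Int × Int :=
  (PySem.List.pyRange r ahi 1).foldl
    (fun bst i => (pvCols a b i blo bhi).foldl (pvUpd a b alo ahi blo bhi i) bst) best

-- ---------- B's DP fold computes the reference best
lemma lmRow_aux (a b : List Char) (alo ahi blo bhi i : Int) (prev : List Int)
    (hi1 : alo ≤ i) (hi2 : i < ahi)
    (hprev : ∀ n : Nat, prev.getD n 0 =
      if (n : Int) < bhi - blo then pvM a b alo ahi blo bhi (i - 1) (blo + (n : Int)) else 0) :
    ∀ (c : Nat) (best : Int × Int × Int), (c : Int) ≤ bhi - blo →
    (PySem.List.pyRange 0 (c : Int) 1).foldl (pvLMStep a b i blo prev)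
      (List.replicate (bhi - blo).toNat 0, best) =
    ((List.range (bhi - blo).toNat).map
        (fun (n : Nat) => if (n : Int) < (c : Int) then pvM a b alo ahi blo bhi i (blo + (n : Int)) else 0),
     ((PySem.List.pyRange blo (blo + (c : Int)) 1).filter
        (fun j => PySem.List.pyGetD a i ' ' == PySem.List.pyGetD b j ' ')).foldl
       (pvUpd a b alo ahi blo bhi i) best) := by
  intro c
  induction c with
  | zero =>
    intro best _
    simp only [Nat.cast_zero]
    rw [PySem.List.pyRange_one_eq_nil le_rfl, List.foldl_nil]
    rw [show blo + (0 : Int) = blo by ring, PySem.List.pyRange_one_eq_nil le_rfl]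
    simp only [List.filter_nil, List.foldl_nil]
    refine Prod.ext ?_ rfl
    show List.replicate (bhi - blo).toNat 0 = (List.range (bhi - blo).toNat).map
      (fun (n : Nat) => if (n : Int) < 0 then pvM a b alo ahi blo bhi i (blo + (n : Int)) else 0)
    have hmc : (List.range (bhi - blo).toNat).map
        (fun (n : Nat) => if (n : Int) < 0 then pvM a b alo ahi blo bhi i (blo + (n : Int)) else 0)
        = (List.range (bhi - blo).toNat).map (fun _ => (0 : Int)) :=
      List.map_congr_left (fun n _ => if_neg (by omega : ¬ ((n : Int) < 0)))
    rw [hmc, List.map_const', List.length_range]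
  | succ c ihc =>
    intro best hc
    have hc1 : ((c + 1 : Nat) : Int) = (c : Int) + 1 := by push_cast; ring
    rw [hc1] at hc ⊢
    rw [PySem.List.pyRange_one_succ_right (by positivity : (0 : Int) ≤ (c : Int))]
    rw [List.foldl_append, ihc best (by omega), List.foldl_cons, List.foldl_nil]
    unfold pvLMStep
    by_cases hm : PySem.List.pyGetD a i ' ' = PySem.List.pyGetD b (blo + (c : Int)) ' '
    · have hwin : blo + (c : Int) < bhi := by omega
      have hsucc := pvM_succ a b alo ahi blo bhi i (blo + (c : Int))
        ⟨hi1, hi2, by omega, hwin, hm⟩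
      have hkm : (if 0 < (c : Int) then PySem.List.pyGetD prev ((c : Int) - 1) 0 else 0) + 1
          = pvM a b alo ahi blo bhi i (blo + (c : Int)) := by
        rcases Nat.eq_zero_or_pos c with rfl | hcpos
        · simp only [Nat.cast_zero] at hsucc ⊢
          rw [if_neg (lt_irrefl (0 : Int)), hsucc,
            pvM_zero a b alo ahi blo bhi (i - 1) (blo + (0 : Int) - 1)
              (by rintro ⟨-, -, h3, -, -⟩; omega)]
        · rw [if_pos (by exact_mod_cast hcpos)]
          obtain ⟨c', rfl⟩ : ∃ c', c = c' + 1 := ⟨c - 1, by omega⟩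
          have hcast : ((c' + 1 : Nat) : Int) - 1 = ((c' : Nat) : Int) := by push_cast; ring
          rw [hcast, PySem.List.pyGetD_natCast, hprev c']
          rw [if_pos (by push_cast at hc ⊢; omega)]
          rw [hsucc]
          congr 2
          push_cast; ring
      rw [if_pos hm]
      simp only [hkm]
      refine Prod.ext ?_ ?_
      · show (_ : List Int).set ((c : Int)).toNat _ = _
        rw [Int.toNat_natCast]
        apply List.ext_getElem
        · simp
        · intro n h1 h2
          simp only [List.getElem_set, List.getElem_map, List.getElem_range]
          by_cases hn : c = n
          · subst hn
            rw [if_pos rfl, if_pos (by omega)]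
          · rw [if_neg hn]
            by_cases hlt : (n : Int) < (c : Int)
            · rw [if_pos hlt, if_pos (by omega)]
            · rw [if_neg hlt, if_neg (by omega)]
      · show _ = _
        rw [show blo + ((c : Int) + 1) = (blo + (c : Int)) + 1 by ring]
        rw [PySem.List.pyRange_one_succ_right (by omega : blo ≤ blo + (c : Int))]
        rw [List.filter_append, List.foldl_append]
        have hfil : List.filter (fun j => PySem.List.pyGetD a i ' ' == PySem.List.pyGetD b j ' ')
            [blo + (c : Int)] = [blo + (c : Int)] := by
          simp [hm]
        rw [hfil, List.foldl_cons, List.foldl_nil]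
        rfl
    · rw [if_neg hm]
      refine Prod.ext ?_ ?_
      · show (_ : List Int) = _
        apply List.map_congr_left
        intro n hn
        by_cases hlt : (n : Int) < (c : Int)
        · rw [if_pos hlt, if_pos (by omega)]
        · by_cases hneq : (n : Int) = (c : Int)
          · have hz : pvM a b alo ahi blo bhi i (blo + (n : Int)) = 0 := by
              rw [show blo + (n : Int) = blo + (c : Int) by omega]
              exact pvM_zero a b alo ahi blo bhi i (blo + (c : Int))
                (by rintro ⟨-, -, -, -, h5⟩; exact hm h5)
            rw [if_neg hlt, if_pos (by omega), hz]
          · rw [if_neg hlt, if_neg (by omega)]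
      · show _ = _
        rw [show blo + ((c : Int) + 1) = (blo + (c : Int)) + 1 by ring]
        rw [PySem.List.pyRange_one_succ_right (by omega : blo ≤ blo + (c : Int))]
        rw [List.filter_append]
        have hfil : List.filter (fun j => PySem.List.pyGetD a i ' ' == PySem.List.pyGetD b j ' ')
            [blo + (c : Int)] = [] := by
          simp [beq_iff_eq, hm]
        rw [hfil, List.append_nil]

lemma lmRow_eq (a b : List Char) (alo ahi blo bhi i : Int) (prev : List Int)
    (best : Int × Int × Int) (hi1 : alo ≤ i) (hi2 : i < ahi)
    (hprev : ∀ n : Nat, prev.getD n 0 =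
      if (n : Int) < bhi - blo then pvM a b alo ahi blo bhi (i - 1) (blo + (n : Int)) else 0) :
    pvLMRow a b i blo (bhi - blo) prev best =
      ((List.range (bhi - blo).toNat).map
        (fun (n : Nat) => pvM a b alo ahi blo bhi i (blo + (n : Int))),
       (pvCols a b i blo bhi).foldl (pvUpd a b alo ahi blo bhi i) best) := by
  rcases le_total blo bhi with hbb | hbb
  · have hcast : (((bhi - blo).toNat : Nat) : Int) = bhi - blo := Int.toNat_of_nonneg (by omega)
    have haux := lmRow_aux a b alo ahi blo bhi i prev hi1 hi2 hprev (bhi - blo).toNat best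
      (by omega)
    rw [hcast] at haux
    unfold pvLMRow
    rw [haux]
    refine Prod.ext ?_ ?_
    · show (_ : List Int) = _
      apply List.map_congr_left
      intro n hn
      rw [if_pos]
      rw [List.mem_range] at hn
      omega
    · show _ = _
      unfold pvCols
      rw [show blo + (bhi - blo) = bhi by ring]
  · unfold pvLMRow pvCols
    rw [PySem.List.pyRange_one_eq_nil (by omega : bhi - blo ≤ 0), List.foldl_nil]
    rw [PySem.List.pyRange_one_eq_nil (by omega : bhi ≤ blo)]
    simp only [List.filter_nil, List.foldl_nil]
    rw [show (bhi - blo).toNat = 0 by omega]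
    rfl

lemma lm_aux (a b : List Char) (alo ahi blo bhi : Int) :
    ∀ (n : Nat) (r : Int) (prev : List Int) (best : Int × Int × Int),
    (ahi - r).toNat = n → alo ≤ r →
    (∀ m : Nat, prev.getD m 0 =
      if (m : Int) < bhi - blo then pvM a b alo ahi blo bhi (r - 1) (blo + (m : Int)) else 0) →
    ((PySem.List.pyRange r ahi 1).foldl
      (fun (st : List Int × (Int × Int × Int)) i => pvLMRow a b i blo (bhi - blo) st.1 st.2)
      (prev, best)).2 = pvBestFrom a b alo ahi blo bhi r best := by
  intro n
  induction n with
  | zero =>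
    intro r prev best hn hr hprev
    rw [PySem.List.pyRange_one_eq_nil (by omega), List.foldl_nil]
    unfold pvBestFrom
    rw [PySem.List.pyRange_one_eq_nil (by omega), List.foldl_nil]
  | succ n ih =>
    intro r prev best hn hr hprev
    have hrh : r < ahi := by omega
    rw [PySem.List.pyRange_one_cons hrh, List.foldl_cons]
    have hrow := lmRow_eq a b alo ahi blo bhi r prev best hr hrh hprev
    rw [hrow]
    rw [ih (r + 1) _ _ (by omega) (by omega) ?_]
    · conv_rhs => unfold pvBestFrom
      rw [PySem.List.pyRange_one_cons hrh, List.foldl_cons]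
      unfold pvBestFrom
      rfl
    · intro m
      by_cases hmw : m < (bhi - blo).toNat
      · rw [List.getD_eq_getElem?_getD, List.getElem?_map, List.getElem?_range hmw]
        simp only [Option.map_some, Option.getD_some]
        rw [if_pos (by omega), show r + 1 - 1 = r by ring]
      · rw [List.getD_eq_default _ _ (by simpa using hmw)]
        rw [if_neg (by omega)]

lemma lm_eq_bestFrom (a b : List Char) (alo ahi blo bhi : Int) :
    pvLM a b alo ahi blo bhi = pvBestFrom a b alo ahi blo bhi alo (alo, blo, 0) := by
  unfold pvLM
  apply lm_aux a b alo ahi blo bhi (ahi - alo).toNat alo _ _ rfl le_rfl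
  intro m
  rw [pvM_zero a b alo ahi blo bhi (alo - 1) (blo + (m : Int)) (by rintro ⟨h1, -⟩; omega)]
  simp only [ite_self]
  rw [List.getD_eq_getElem?_getD, List.getElem?_replicate]
  by_cases hmw : m < (bhi - blo).toNat
  · rw [if_pos hmw]; rfl
  · rw [if_neg hmw]; rfl

-- ---------- A's find_longest_match core computes the reference best (valid b-window)
lemma flmInner_struct (i blo bhi : Int) (d : PySem.Dict Int Int) :
    ∀ (js : List Int) (nd : PySem.Dict Int Int) (best : Int × Int × Int),
    js.Pairwise (· < ·) →
    (pvFlmInner i blo bhi d js nd best).2 =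
      (js.filter (fun j => decide (blo ≤ j) && decide (j < bhi))).foldl
        (fun bst j => if bst.2.2 < d.getD (j - 1) 0 + 1 then
            (i - (d.getD (j - 1) 0 + 1) + 1, j - (d.getD (j - 1) 0 + 1) + 1, d.getD (j - 1) 0 + 1)
          else bst) best
    ∧ ∀ jj : Int, (pvFlmInner i blo bhi d js nd best).1.getD jj 0 =
        if jj ∈ js.filter (fun j => decide (blo ≤ j) && decide (j < bhi))
        then d.getD (jj - 1) 0 + 1 else nd.getD jj 0 := by
  intro js
  induction js with
  | nil =>
    intro nd best _
    exact ⟨rfl, fun jj => by simp [pvFlmInner]⟩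
  | cons j js' ih =>
    intro nd best hp
    obtain ⟨hall, htail⟩ := List.pairwise_cons.mp hp
    by_cases h1 : j < blo
    · have hstep : pvFlmInner i blo bhi d (j :: js') nd best =
          pvFlmInner i blo bhi d js' nd best := by
        rw [pvFlmInner, if_pos h1]
      have hf : (j :: js').filter (fun x => decide (blo ≤ x) && decide (x < bhi)) =
          js'.filter (fun x => decide (blo ≤ x) && decide (x < bhi)) := by
        rw [List.filter_cons, if_neg (by simp; omega)]
      obtain ⟨hA, hB⟩ := ih nd best htail
      rw [hstep, hf]
      exact ⟨hA, hB⟩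
    · by_cases h2 : bhi ≤ j
      · have hstep : pvFlmInner i blo bhi d (j :: js') nd best = (nd, best) := by
          rw [pvFlmInner, if_neg h1, if_pos h2]
        have hf : (j :: js').filter (fun x => decide (blo ≤ x) && decide (x < bhi)) = [] := by
          rw [List.filter_eq_nil_iff]
          intro x hx
          rcases List.mem_cons.mp hx with rfl | hx'
          · simp; omega
          · have := hall x hx'; simp; omega
        rw [hstep, hf]
        exact ⟨rfl, fun jj => by simp⟩
      · have hstep : pvFlmInner i blo bhi d (j :: js') nd best =
            pvFlmInner i blo bhi d js' (nd.insert j (d.getD (j - 1) 0 + 1))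
              (if best.2.2 < d.getD (j - 1) 0 + 1
               then (i - (d.getD (j - 1) 0 + 1) + 1, j - (d.getD (j - 1) 0 + 1) + 1,
                 d.getD (j - 1) 0 + 1) else best) := by
          rw [pvFlmInner, if_neg h1, if_neg h2]
        have hf : (j :: js').filter (fun x => decide (blo ≤ x) && decide (x < bhi)) =
            j :: js'.filter (fun x => decide (blo ≤ x) && decide (x < bhi)) := by
          rw [List.filter_cons, if_pos (by simp; omega)]
        obtain ⟨hA, hB⟩ := ih (nd.insert j (d.getD (j - 1) 0 + 1))
          (if best.2.2 < d.getD (j - 1) 0 + 1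
           then (i - (d.getD (j - 1) 0 + 1) + 1, j - (d.getD (j - 1) 0 + 1) + 1,
             d.getD (j - 1) 0 + 1) else best) htail
        rw [hstep, hf]
        constructor
        · rw [hA, List.foldl_cons]
        · intro jj
          rw [hB jj]
          by_cases hjj : jj ∈ js'.filter (fun x => decide (blo ≤ x) && decide (x < bhi))
          · rw [if_pos hjj, if_pos (List.mem_cons_of_mem _ hjj)]
          · rw [if_neg hjj]
            by_cases hjje : jj = j
            · subst hjje
              rw [if_pos (List.mem_cons_self), PySem.Dict.getD_insert, if_pos rfl]
            · rw [if_neg (by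
                intro hmem
                rcases List.mem_cons.mp hmem with h | h
                · exact hjje h
                · exact hjj h)]
              rw [PySem.Dict.getD_insert, if_neg hjje]

lemma b2j_getD (b : List Char) (c : Char) :
    (pvB2j b).getD c [] = (PySem.List.pyRange 0 (b.length : Int) 1).filter
      (fun j => PySem.List.pyGetD b j ' ' == c) := by
  have e : pvB2j b = ((PySem.List.enumerate b).map (fun p : Int × Char => (p.2, p.1))).foldl
      (fun d q => d.modify q.1 [] (fun l => l ++ [q.2])) PySem.Dict.empty := by
    rw [List.foldl_map]
    rfl
  rw [e, PySem.Dict.getD_foldl_modify_append, PySem.Dict.getD_empty, List.nil_append]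
  rw [PySem.List.enumerate_eq_map_pyRange b ' ']
  rw [List.map_map, List.filter_map, List.map_map]
  have hlen : PySem.List.len b = (b.length : Int) := by simp [PySem.List.len_eq]
  rw [hlen]
  have hid : ((fun x : Char × Int => x.2) ∘ (fun p : Int × Char => (p.2, p.1)) ∘
      (fun j : Int => (j, PySem.List.pyGetD b j ' '))) = id := rfl
  rw [hid, List.map_id]
  apply List.filter_congr
  intro x _
  rfl

lemma filt_cols (a b : List Char) (blo bhi r : Int) (hblo : 0 ≤ blo)
    (hbhi : bhi ≤ (b.length : Int)) :
    ((PySem.List.pyRange 0 (b.length : Int) 1).filter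
        (fun j => PySem.List.pyGetD b j ' ' == PySem.List.pyGetD a r ' ')).filter
      (fun j => decide (blo ≤ j) && decide (j < bhi)) = pvCols a b r blo bhi := by
  rcases le_total blo bhi with hbb | hbb
  · rw [List.filter_filter]
    unfold pvCols
    rw [PySem.List.pyRange_one_append 0 blo (b.length : Int) hblo (by omega),
      List.filter_append,
      PySem.List.pyRange_one_append blo bhi (b.length : Int) hbb (by omega),
      List.filter_append]
    have h1 : (PySem.List.pyRange 0 blo 1).filter
        (fun a_1 => decide (blo ≤ a_1) && decide (a_1 < bhi) &&
          (PySem.List.pyGetD b a_1 ' ' == PySem.List.pyGetD a r ' ')) = [] := by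
      rw [List.filter_eq_nil_iff]
      intro x hx
      rw [PySem.List.mem_pyRange_one] at hx
      simp
      omega
    have h3 : (PySem.List.pyRange bhi (b.length : Int) 1).filter
        (fun a_1 => decide (blo ≤ a_1) && decide (a_1 < bhi) &&
          (PySem.List.pyGetD b a_1 ' ' == PySem.List.pyGetD a r ' ')) = [] := by
      rw [List.filter_eq_nil_iff]
      intro x hx
      rw [PySem.List.mem_pyRange_one] at hx
      simp
      omega
    have h2 : (PySem.List.pyRange blo bhi 1).filter
        (fun a_1 => decide (blo ≤ a_1) && decide (a_1 < bhi) &&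
          (PySem.List.pyGetD b a_1 ' ' == PySem.List.pyGetD a r ' ')) =
        (PySem.List.pyRange blo bhi 1).filter
          (fun j => PySem.List.pyGetD a r ' ' == PySem.List.pyGetD b j ' ') := by
      apply List.filter_congr
      intro x hx
      rw [PySem.List.mem_pyRange_one] at hx
      have hd1 : decide (blo ≤ x) = true := by simp; omega
      have hd2 : decide (x < bhi) = true := by simp; omega
      rw [hd1, hd2]
      simp only [Bool.true_and]
      rw [Bool.eq_iff_iff]
      simp only [beq_iff_eq]
      exact eq_comm
    rw [h1, h2, h3, List.nil_append, List.append_nil]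
  · unfold pvCols
    rw [PySem.List.pyRange_one_eq_nil hbb, List.filter_nil]
    rw [List.filter_eq_nil_iff]
    intro x hx
    rw [List.mem_filter, PySem.List.mem_pyRange_one] at hx
    simp
    omega

def pvAStep (a b : List Char) (blo bhi : Int)
    (st : PySem.Dict Int Int × (Int × Int × Int)) (i : Int) :
    PySem.Dict Int Int × (Int × Int × Int) :=
  pvFlmInner i blo bhi st.1 ((pvB2j b).getD ((PySem.List.pyGet? a i).getD ' ') [])
    PySem.Dict.empty st.2

lemma flm_core_aux (a b : List Char) (alo ahi blo bhi : Int)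
    (hblo : 0 ≤ blo) (hbhi : bhi ≤ (b.length : Int)) :
    ∀ (n : Nat) (r : Int) (st : PySem.Dict Int Int × (Int × Int × Int)),
    (ahi - r).toNat = n → alo ≤ r →
    (∀ jj : Int, st.1.getD jj 0 =
      if blo ≤ jj ∧ jj < bhi then pvM a b alo ahi blo bhi (r - 1) jj else 0) →
    ((PySem.List.pyRange r ahi 1).foldl (pvAStep a b blo bhi) st).2 =
      pvBestFrom a b alo ahi blo bhi r st.2 := by
  intro n
  induction n with
  | zero =>
    intro r st hn hr _
    rw [PySem.List.pyRange_one_eq_nil (by omega), List.foldl_nil]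
    unfold pvBestFrom
    rw [PySem.List.pyRange_one_eq_nil (by omega), List.foldl_nil]
  | succ n ih =>
    intro r st hn hr hd
    have hrh : r < ahi := by omega
    rw [PySem.List.pyRange_one_cons hrh, List.foldl_cons]
    have hjs : (pvB2j b).getD (PySem.List.pyGetD a r ' ') [] =
        (PySem.List.pyRange 0 (b.length : Int) 1).filter
          (fun j => PySem.List.pyGetD b j ' ' == PySem.List.pyGetD a r ' ') :=
      b2j_getD b _
    have hstep2 : pvAStep a b blo bhi st r = pvFlmInner r blo bhi st.1
        ((PySem.List.pyRange 0 (b.length : Int) 1).filter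
          (fun j => PySem.List.pyGetD b j ' ' == PySem.List.pyGetD a r ' '))
        PySem.Dict.empty st.2 := by
      rw [show pvAStep a b blo bhi st r = pvFlmInner r blo bhi st.1
        ((pvB2j b).getD (PySem.List.pyGetD a r ' ') []) PySem.Dict.empty st.2 from rfl, hjs]
    have hsorted : ((PySem.List.pyRange 0 (b.length : Int) 1).filter
        (fun j => PySem.List.pyGetD b j ' ' == PySem.List.pyGetD a r ' ')).Pairwise (· < ·) :=
      List.Pairwise.filter _ (PySem.List.pairwise_lt_pyRange_one 0 (b.length : Int))
    obtain ⟨hA, hB⟩ := flmInner_struct r blo bhi st.1 _ PySem.Dict.empty st.2 hsorted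
    -- the k used by the dict fold equals pvM r j on every processed column
    have hdk : ∀ x ∈ pvCols a b r blo bhi,
        st.1.getD (x - 1) 0 + 1 = pvM a b alo ahi blo bhi r x := by
      intro x hx
      have hxw : blo ≤ x ∧ x < bhi ∧
          PySem.List.pyGetD a r ' ' = PySem.List.pyGetD b x ' ' := by
        unfold pvCols at hx
        rw [List.mem_filter, PySem.List.mem_pyRange_one] at hx
        exact ⟨hx.1.1, hx.1.2, by simpa [beq_iff_eq] using hx.2⟩
      have hdg : st.1.getD (x - 1) 0 = pvM a b alo ahi blo bhi (r - 1) (x - 1) := by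
        rw [hd (x - 1)]
        by_cases hxl : blo ≤ x - 1
        · rw [if_pos ⟨hxl, by omega⟩]
        · rw [if_neg (by omega)]
          rw [pvM_zero a b alo ahi blo bhi (r - 1) (x - 1) (by rintro ⟨-, -, h3, -, -⟩; omega)]
      rw [hdg, (pvM_succ a b alo ahi blo bhi r x ⟨hr, hrh, hxw.1, hxw.2.1, hxw.2.2⟩).symm]
    have hmem_iff : ∀ jj : Int, jj ∈ pvCols a b r blo bhi ↔
        (blo ≤ jj ∧ jj < bhi ∧ PySem.List.pyGetD a r ' ' = PySem.List.pyGetD b jj ' ') := by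
      intro jj
      unfold pvCols
      rw [List.mem_filter, PySem.List.mem_pyRange_one]
      constructor
      · rintro ⟨⟨hx1, hx2⟩, hx3⟩
        exact ⟨hx1, hx2, by simpa [beq_iff_eq] using hx3⟩
      · rintro ⟨hx1, hx2, hx3⟩
        exact ⟨⟨hx1, hx2⟩, by simpa [beq_iff_eq] using hx3⟩
    rw [ih (r + 1) (pvAStep a b blo bhi st r) (by omega) (by omega) ?_]
    · -- best after the row is the reference row fold
      have hP2 : (pvAStep a b blo bhi st r).2 =
          (pvCols a b r blo bhi).foldl (pvUpd a b alo ahi blo bhi r) st.2 := by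
        rw [hstep2, hA, filt_cols a b blo bhi r hblo hbhi]
        apply PySem.List.foldl_congr_mem
        intro bst x hx
        rw [hdk x hx]
        rfl
      rw [hP2]
      conv_rhs => unfold pvBestFrom
      rw [PySem.List.pyRange_one_cons hrh, List.foldl_cons]
      unfold pvBestFrom
      rfl
    · -- the dict after the row is the next row valuation
      intro jj
      rw [hstep2, hB jj, filt_cols a b blo bhi r hblo hbhi]
      by_cases hjj : jj ∈ pvCols a b r blo bhi
      · have hw := (hmem_iff jj).mp hjj
        rw [if_pos hjj, if_pos ⟨hw.1, hw.2.1⟩, hdk jj hjj]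
        rw [show r + 1 - 1 = r by ring]
      · rw [if_neg hjj, PySem.Dict.getD_empty]
        by_cases hw : blo ≤ jj ∧ jj < bhi
        · rw [if_pos hw, show r + 1 - 1 = r by ring]
          rw [pvM_zero a b alo ahi blo bhi r jj
            (by rintro ⟨-, -, h3', h4', h5'⟩; exact hjj ((hmem_iff jj).mpr ⟨h3', h4', h5'⟩))]
        · rw [if_neg hw]

lemma core_eq_bestFrom (a b : List Char) (alo ahi blo bhi : Int)
    (hblo : 0 ≤ blo) (hbhi : bhi ≤ (b.length : Int)) :
    pvFlmCore a (pvB2j b) alo ahi blo bhi = pvBestFrom a b alo ahi blo bhi alo (alo, blo, 0) := by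
  unfold pvFlmCore
  exact flm_core_aux a b alo ahi blo bhi hblo hbhi (ahi - alo).toNat alo
    (PySem.Dict.empty, (alo, blo, 0)) rfl le_rfl
    (fun jj => by
      rw [PySem.Dict.getD_empty,
        pvM_zero a b alo ahi blo bhi (alo - 1) jj (by rintro ⟨h1, -⟩; omega)]
      simp)

-- ---------- the reference best is a genuine maximum with recorded endpoint
def pvGood (a b : List Char) (alo ahi blo bhi : Int) (best : Int × Int × Int) : Prop :=
  0 ≤ best.2.2 ∧ (∀ i j, pvM a b alo ahi blo bhi i j ≤ best.2.2) ∧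
    (best.2.2 = 0 → best = (alo, blo, 0)) ∧
    (0 < best.2.2 → ∃ ie je, best.2.2 = pvM a b alo ahi blo bhi ie je ∧
      best.1 = ie - best.2.2 + 1 ∧ best.2.1 = je - best.2.2 + 1)

def pvGoodUpto (a b : List Char) (alo ahi blo bhi r : Int) (best : Int × Int × Int) : Prop :=
  0 ≤ best.2.2 ∧ (∀ i j, i < r → pvM a b alo ahi blo bhi i j ≤ best.2.2) ∧
    (best.2.2 = 0 → best = (alo, blo, 0)) ∧
    (0 < best.2.2 → ∃ ie je, best.2.2 = pvM a b alo ahi blo bhi ie je ∧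
      best.1 = ie - best.2.2 + 1 ∧ best.2.1 = je - best.2.2 + 1)

lemma upd_facts (a b : List Char) (alo ahi blo bhi i : Int) (best : Int × Int × Int) (j : Int) :
    best.2.2 ≤ (pvUpd a b alo ahi blo bhi i best j).2.2 ∧
      pvM a b alo ahi blo bhi i j ≤ (pvUpd a b alo ahi blo bhi i best j).2.2 := by
  unfold pvUpd
  by_cases h : best.2.2 < pvM a b alo ahi blo bhi i j
  · simp [h]; omega
  · simp [h]; omega

lemma foldl_upd_good (a b : List Char) (alo ahi blo bhi r : Int) :
    ∀ (l : List Int) (best : Int × Int × Int),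
    0 ≤ best.2.2 → (best.2.2 = 0 → best = (alo, blo, 0)) →
    (0 < best.2.2 → ∃ ie je, best.2.2 = pvM a b alo ahi blo bhi ie je ∧
      best.1 = ie - best.2.2 + 1 ∧ best.2.1 = je - best.2.2 + 1) →
    (0 ≤ (l.foldl (pvUpd a b alo ahi blo bhi r) best).2.2 ∧
     ((l.foldl (pvUpd a b alo ahi blo bhi r) best).2.2 = 0 →
        l.foldl (pvUpd a b alo ahi blo bhi r) best = (alo, blo, 0)) ∧
     (0 < (l.foldl (pvUpd a b alo ahi blo bhi r) best).2.2 →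
        ∃ ie je, (l.foldl (pvUpd a b alo ahi blo bhi r) best).2.2 = pvM a b alo ahi blo bhi ie je ∧
          (l.foldl (pvUpd a b alo ahi blo bhi r) best).1 =
            ie - (l.foldl (pvUpd a b alo ahi blo bhi r) best).2.2 + 1 ∧
          (l.foldl (pvUpd a b alo ahi blo bhi r) best).2.1 =
            je - (l.foldl (pvUpd a b alo ahi blo bhi r) best).2.2 + 1) ∧
     best.2.2 ≤ (l.foldl (pvUpd a b alo ahi blo bhi r) best).2.2 ∧
     (∀ j ∈ l, pvM a b alo ahi blo bhi r j ≤ (l.foldl (pvUpd a b alo ahi blo bhi r) best).2.2)) := by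
  intro l
  induction l with
  | nil =>
    intro best h0 hz hex
    exact ⟨h0, hz, hex, le_rfl, by intro j hj; cases hj⟩
  | cons j l' ih =>
    intro best h0 hz hex
    simp only [List.foldl_cons]
    have hstep := upd_facts a b alo ahi blo bhi r best j
    have h0' : 0 ≤ (pvUpd a b alo ahi blo bhi r best j).2.2 := by omega
    have hz' : (pvUpd a b alo ahi blo bhi r best j).2.2 = 0 →
        pvUpd a b alo ahi blo bhi r best j = (alo, blo, 0) := by
      intro hzz
      unfold pvUpd at hzz ⊢
      by_cases h : best.2.2 < pvM a b alo ahi blo bhi r j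
      · simp [h] at hzz ⊢; omega
      · simp [h] at hzz ⊢; exact hz hzz
    have hex' : 0 < (pvUpd a b alo ahi blo bhi r best j).2.2 →
        ∃ ie je, (pvUpd a b alo ahi blo bhi r best j).2.2 = pvM a b alo ahi blo bhi ie je ∧
          (pvUpd a b alo ahi blo bhi r best j).1 =
            ie - (pvUpd a b alo ahi blo bhi r best j).2.2 + 1 ∧
          (pvUpd a b alo ahi blo bhi r best j).2.1 =
            je - (pvUpd a b alo ahi blo bhi r best j).2.2 + 1 := by
      intro hpos
      unfold pvUpd at hpos ⊢
      by_cases h : best.2.2 < pvM a b alo ahi blo bhi r j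
      · simp only [if_pos h]
        exact ⟨r, j, rfl, rfl, rfl⟩
      · simp only [if_neg h] at hpos ⊢
        exact hex hpos
    obtain ⟨f0, fz, fex, fmono, fall⟩ := ih (pvUpd a b alo ahi blo bhi r best j) h0' hz' hex'
    refine ⟨f0, fz, fex, by omega, ?_⟩
    intro jj hjj
    rcases List.mem_cons.mp hjj with rfl | hjj'
    · omega
    · exact fall jj hjj'

lemma mem_cols (a b : List Char) (alo ahi blo bhi r j : Int)
    (h : 0 < pvM a b alo ahi blo bhi r j) : j ∈ pvCols a b r blo bhi := by
  have h5 := pvM_pos a b alo ahi blo bhi r j h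
  unfold pvCols
  rw [List.mem_filter, PySem.List.mem_pyRange_one]
  exact ⟨⟨h5.2.2.1, h5.2.2.2.1⟩, by simpa using h5.2.2.2.2⟩

lemma bestFrom_good_aux (a b : List Char) (alo ahi blo bhi : Int) :
    ∀ (n : Nat) (r : Int) (best : Int × Int × Int), (ahi - r).toNat = n →
    pvGoodUpto a b alo ahi blo bhi r best →
    pvGoodUpto a b alo ahi blo bhi ahi (pvBestFrom a b alo ahi blo bhi r best) := by
  intro n
  induction n with
  | zero =>
    intro r best hn hg
    unfold pvBestFrom
    rw [PySem.List.pyRange_one_eq_nil (by omega)]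
    obtain ⟨h0, hall, hz, hex⟩ := hg
    exact ⟨h0, fun i j hi => hall i j (by omega), hz, hex⟩
  | succ n ih =>
    intro r best hn hg
    have hn2 : (ahi - (r + 1)).toNat = n := by omega
    have hr : r < ahi := by omega
    unfold pvBestFrom
    rw [PySem.List.pyRange_one_cons hr, List.foldl_cons]
    obtain ⟨h0, hall, hz, hex⟩ := hg
    obtain ⟨f0, fz, fex, fmono, fall⟩ :=
      foldl_upd_good a b alo ahi blo bhi r (pvCols a b r blo bhi) best h0 hz hex
    have hg' : pvGoodUpto a b alo ahi blo bhi (r + 1)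
        ((pvCols a b r blo bhi).foldl (pvUpd a b alo ahi blo bhi r) best) := by
      refine ⟨f0, ?_, fz, fex⟩
      intro i j hi
      by_cases hir : i < r
      · have := hall i j hir; omega
      · have hir' : i = r := by omega
        subst hir'
        by_cases hm : 0 < pvM a b alo ahi blo bhi i j
        · exact fall j (mem_cols a b alo ahi blo bhi i j hm)
        · have := pvM_nonneg a b alo ahi blo bhi i j; omega
    exact ih (r + 1) _ hn2 hg'

lemma bestFrom_good (a b : List Char) (alo ahi blo bhi : Int) :
    pvGood a b alo ahi blo bhi (pvBestFrom a b alo ahi blo bhi alo (alo, blo, 0)) := by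
  have hinit : pvGoodUpto a b alo ahi blo bhi alo (alo, blo, 0) := by
    refine ⟨le_rfl, ?_, fun _ => rfl, by intro h; simp at h⟩
    intro i j hi
    rw [pvM_zero a b alo ahi blo bhi i j (by omega)]
  have hfin := bestFrom_good_aux a b alo ahi blo bhi (ahi - alo).toNat alo (alo, blo, 0) rfl hinit
  obtain ⟨h0, hall, hz, hex⟩ := hfin
  refine ⟨h0, ?_, hz, hex⟩
  intro i j
  by_cases hi : i < ahi
  · exact hall i j hi
  · rw [pvM_zero a b alo ahi blo bhi i j (by omega)]
    exact h0

-- ---------- the two extension whiles never move a pvGood best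
lemma extendL_id (a b : List Char) (alo ahi blo bhi : Int) (best : Int × Int × Int)
    (hg : pvGood a b alo ahi blo bhi best) :
    pvExtendL a b alo blo best.1 best.2.1 best.2.2 = best := by
  obtain ⟨h0, hall, hz, hex⟩ := hg
  have hcond : ¬ (alo < best.1 ∧ blo < best.2.1 ∧
      PySem.List.pyGet? a (best.1 - 1) = PySem.List.pyGet? b (best.2.1 - 1)) := by
    rintro ⟨h1, h2, h3⟩
    by_cases hk : best.2.2 = 0
    · rw [hz hk] at h1; omega
    · obtain ⟨ie, je, hm, hbi, hbj⟩ := hex (by omega)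
      have ht : (((best.2.2 - 1).toNat : Nat) : Int) = best.2.2 - 1 :=
        Int.toNat_of_nonneg (by omega)
      have hsub := pvM_sub a b alo ahi blo bhi (best.2.2 - 1).toNat ie je (by omega)
      have h1m : pvM a b alo ahi blo bhi best.1 best.2.1 = 1 := by
        rw [show best.1 = ie - (((best.2.2 - 1).toNat : Nat) : Int) by omega,
          show best.2.1 = je - (((best.2.2 - 1).toNat : Nat) : Int) by omega, hsub]
        omega
      have h5 := pvM_pos a b alo ahi blo bhi best.1 best.2.1 (by omega)
      have hstep := pvM_succ a b alo ahi blo bhi best.1 best.2.1 h5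
      have hmatch : PySem.List.pyGetD a (best.1 - 1) ' ' = PySem.List.pyGetD b (best.2.1 - 1) ' ' :=
        congrArg (fun o => o.getD ' ') h3
      have hcond2 : alo ≤ best.1 - 1 ∧ best.1 - 1 < ahi ∧ blo ≤ best.2.1 - 1 ∧
          best.2.1 - 1 < bhi ∧
          PySem.List.pyGetD a (best.1 - 1) ' ' = PySem.List.pyGetD b (best.2.1 - 1) ' ' :=
        ⟨by omega, by omega, by omega, by omega, hmatch⟩
      have hsucc2 := pvM_succ a b alo ahi blo bhi (best.1 - 1) (best.2.1 - 1) hcond2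
      have hnn := pvM_nonneg a b alo ahi blo bhi (best.1 - 1 - 1) (best.2.1 - 1 - 1)
      omega
  rw [pvExtendL, dif_neg hcond]

lemma extendR_id (a b : List Char) (alo ahi blo bhi : Int) (best : Int × Int × Int)
    (hg : pvGood a b alo ahi blo bhi best) :
    pvExtendR a b ahi bhi best.1 best.2.1 best.2.2 = best := by
  obtain ⟨h0, hall, hz, hex⟩ := hg
  have hcond : ¬ (best.1 + best.2.2 < ahi ∧ best.2.1 + best.2.2 < bhi ∧
      PySem.List.pyGet? a (best.1 + best.2.2) = PySem.List.pyGet? b (best.2.1 + best.2.2)) := by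
    rintro ⟨h1, h2, h3⟩
    have hmatch : PySem.List.pyGetD a (best.1 + best.2.2) ' ' =
        PySem.List.pyGetD b (best.2.1 + best.2.2) ' ' := congrArg (fun o => o.getD ' ') h3
    by_cases hk : best.2.2 = 0
    · have hb0 := hz hk
      have hcond2 : alo ≤ alo ∧ alo < ahi ∧ blo ≤ blo ∧ blo < bhi ∧
          PySem.List.pyGetD a alo ' ' = PySem.List.pyGetD b blo ' ' := by
        rw [hb0] at h1 h2 hmatch; simp at h1 h2 hmatch
        exact ⟨le_rfl, by omega, le_rfl, by omega, by simpa using hmatch⟩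
      have hsucc := pvM_succ a b alo ahi blo bhi alo blo hcond2
      have hnn := pvM_nonneg a b alo ahi blo bhi (alo - 1) (blo - 1)
      have := hall alo blo
      omega
    · obtain ⟨ie, je, hm, hbi, hbj⟩ := hex (by omega)
      have h5 := pvM_pos a b alo ahi blo bhi ie je (by omega)
      have hcond2 : alo ≤ ie + 1 ∧ ie + 1 < ahi ∧ blo ≤ je + 1 ∧ je + 1 < bhi ∧
          PySem.List.pyGetD a (ie + 1) ' ' = PySem.List.pyGetD b (je + 1) ' ' := by
        refine ⟨by omega, by omega, by omega, by omega, ?_⟩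
        rw [show ie + 1 = best.1 + best.2.2 by omega, show je + 1 = best.2.1 + best.2.2 by omega]
        exact hmatch
      have hsucc := pvM_succ a b alo ahi blo bhi (ie + 1) (je + 1) hcond2
      have := hall (ie + 1) (je + 1)
      simp only [add_sub_cancel_right] at hsucc
      omega
  rw [pvExtendR, dif_neg hcond]

-- ---------- the two longest-match implementations agree (valid b-window)
lemma flm_eq_lm (a b : List Char) (alo ahi blo bhi : Int)
    (hblo : 0 ≤ blo) (hbhi : bhi ≤ (b.length : Int)) :
    pvFlm a b (pvB2j b) alo ahi blo bhi = pvLM a b alo ahi blo bhi := by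
  have hg := bestFrom_good a b alo ahi blo bhi
  rw [← lm_eq_bestFrom] at hg
  show pvExtendR a b ahi bhi
      (pvExtendL a b alo blo (pvFlmCore a (pvB2j b) alo ahi blo bhi).1
        (pvFlmCore a (pvB2j b) alo ahi blo bhi).2.1
        (pvFlmCore a (pvB2j b) alo ahi blo bhi).2.2).1
      (pvExtendL a b alo blo (pvFlmCore a (pvB2j b) alo ahi blo bhi).1
        (pvFlmCore a (pvB2j b) alo ahi blo bhi).2.1
        (pvFlmCore a (pvB2j b) alo ahi blo bhi).2.2).2.1
      (pvExtendL a b alo blo (pvFlmCore a (pvB2j b) alo ahi blo bhi).1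
        (pvFlmCore a (pvB2j b) alo ahi blo bhi).2.1
        (pvFlmCore a (pvB2j b) alo ahi blo bhi).2.2).2.2 = pvLM a b alo ahi blo bhi
  rw [core_eq_bestFrom a b alo ahi blo bhi hblo hbhi, ← lm_eq_bestFrom]
  rw [extendL_id a b alo ahi blo bhi _ hg]
  exact extendR_id a b alo ahi blo bhi _ hg

-- pvLM on an empty window finds nothing
lemma lm_snd_const (a b : List Char) (blo bhi : Int) (hw : bhi ≤ blo) :
    ∀ (l : List Int) (st : List Int × (Int × Int × Int)),
      (l.foldl (fun st i => pvLMRow a b i blo (bhi - blo) st.1 st.2) st).2 = st.2 := by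
  intro l
  induction l with
  | nil => intro st; rfl
  | cons x xs ih =>
    intro st
    rw [List.foldl_cons, ih]
    show (pvLMRow a b x blo (bhi - blo) st.1 st.2).2 = st.2
    unfold pvLMRow
    rw [PySem.List.pyRange_one_eq_nil (by omega)]
    rfl

lemma lm_empty (a b : List Char) (alo ahi blo bhi : Int) (h : ahi ≤ alo ∨ bhi ≤ blo) :
    pvLM a b alo ahi blo bhi = (alo, blo, 0) := by
  rcases h with h | h
  · unfold pvLM
    rw [PySem.List.pyRange_one_eq_nil h]
    rfl
  · unfold pvLM
    rw [lm_snd_const a b blo bhi h]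

-- ---------- bounds of the found block
lemma lm_bounds (a b : List Char) (alo ahi blo bhi : Int) :
    (pvLM a b alo ahi blo bhi = (alo, blo, 0)) ∨
    (1 ≤ (pvLM a b alo ahi blo bhi).2.2 ∧
      alo ≤ (pvLM a b alo ahi blo bhi).1 ∧
      (pvLM a b alo ahi blo bhi).1 + (pvLM a b alo ahi blo bhi).2.2 ≤ ahi ∧
      blo ≤ (pvLM a b alo ahi blo bhi).2.1 ∧
      (pvLM a b alo ahi blo bhi).2.1 + (pvLM a b alo ahi blo bhi).2.2 ≤ bhi) := by
  have hg := bestFrom_good a b alo ahi blo bhi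
  rw [← lm_eq_bestFrom] at hg
  obtain ⟨h0, hall, hz, hex⟩ := hg
  by_cases hk : (pvLM a b alo ahi blo bhi).2.2 = 0
  · exact Or.inl (hz hk)
  · obtain ⟨ie, je, hm, hbi, hbj⟩ := hex (by omega)
    have h5 := pvM_pos a b alo ahi blo bhi ie je (by omega)
    have hle := pvM_le a b alo ahi blo bhi ie je (by omega)
    exact Or.inr ⟨by omega, by omega, by omega, by omega, by omega⟩

-- ---------- block lists of the recursion: pre-order (root, right, left — difflib's pop order)
-- ---------- and in-order (left, root, right — sorted order)
def pvPre (a b : List Char) : Nat → Int → Int → Int → Int → List (Int × Int × Int)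
  | 0, _, _, _, _ => []
  | fuel + 1, alo, ahi, blo, bhi =>
    let m := pvLM a b alo ahi blo bhi
    if m.2.2 = 0 then []
    else (m.1, m.2.1, m.2.2) ::
      (pvPre a b fuel (m.1 + m.2.2) ahi (m.2.1 + m.2.2) bhi ++ pvPre a b fuel alo m.1 blo m.2.1)

def pvInord (a b : List Char) : Nat → Int → Int → Int → Int → List (Int × Int × Int)
  | 0, _, _, _, _ => []
  | fuel + 1, alo, ahi, blo, bhi =>
    let m := pvLM a b alo ahi blo bhi
    if m.2.2 = 0 then []
    else pvInord a b fuel alo m.1 blo m.2.1 ++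
      (m.1, m.2.1, m.2.2) :: pvInord a b fuel (m.1 + m.2.2) ahi (m.2.1 + m.2.2) bhi

lemma pre_fuel (a b : List Char) : ∀ (f g : Nat) (alo ahi blo bhi : Int),
    (ahi - alo).toNat < f → (ahi - alo).toNat < g →
    pvPre a b f alo ahi blo bhi = pvPre a b g alo ahi blo bhi := by
  intro f
  induction f with
  | zero => intro g alo ahi blo bhi hf _; exact absurd hf (Nat.not_lt_zero _)
  | succ f ih =>
    intro g alo ahi blo bhi hf hg
    cases g with
    | zero => exact absurd hg (Nat.not_lt_zero _)
    | succ g =>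
      rw [pvPre, pvPre]
      by_cases hk : (pvLM a b alo ahi blo bhi).2.2 = 0
      · simp [hk]
      · rcases lm_bounds a b alo ahi blo bhi with h0 | hb
        · exact absurd (by rw [h0]) hk
        · simp only [if_neg hk]
          rw [ih g ((pvLM a b alo ahi blo bhi).1 + (pvLM a b alo ahi blo bhi).2.2) ahi _ _
              (by omega) (by omega),
            ih g alo (pvLM a b alo ahi blo bhi).1 _ _ (by omega) (by omega)]

lemma pre_perm_inord (a b : List Char) : ∀ (f : Nat) (alo ahi blo bhi : Int),
    (pvPre a b f alo ahi blo bhi).Perm (pvInord a b f alo ahi blo bhi) := by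
  intro f
  induction f with
  | zero => intro alo ahi blo bhi; rw [pvPre, pvInord]
  | succ f ih =>
    intro alo ahi blo bhi
    rw [pvPre, pvInord]
    by_cases hk : (pvLM a b alo ahi blo bhi).2.2 = 0
    · simp [hk]
    · simp only [if_neg hk]
      refine List.Perm.trans (List.Perm.cons _ (List.Perm.trans
        (List.Perm.append (ih _ _ _ _) (ih _ _ _ _)) List.perm_append_comm)) ?_
      exact List.perm_middle.symm

-- every block of the recursion lies inside its window, with k ≥ 1
lemma inord_bounds (a b : List Char) : ∀ (f : Nat) (alo ahi blo bhi : Int),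
    ∀ t ∈ pvInord a b f alo ahi blo bhi,
      alo ≤ t.1 ∧ t.1 + t.2.2 ≤ ahi ∧ blo ≤ t.2.1 ∧ t.2.1 + t.2.2 ≤ bhi ∧ 1 ≤ t.2.2 := by
  intro f
  induction f with
  | zero => intro alo ahi blo bhi t ht; rw [pvInord] at ht; simp at ht
  | succ f ih =>
    intro alo ahi blo bhi t ht
    rw [pvInord] at ht
    by_cases hk : (pvLM a b alo ahi blo bhi).2.2 = 0
    · simp [hk] at ht
    · rcases lm_bounds a b alo ahi blo bhi with h0 | hb
      · exact absurd (by rw [h0]) hk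
      · simp only [if_neg hk, List.mem_append, List.mem_cons] at ht
        rcases ht with hL | hblk | hR
        · have := ih _ _ _ _ t hL; omega
        · subst hblk; simp only []; omega
        · have := ih _ _ _ _ t hR; omega

lemma inord_pairwise (a b : List Char) : ∀ (f : Nat) (alo ahi blo bhi : Int),
    (pvInord a b f alo ahi blo bhi).Pairwise (fun s t => s.1 < t.1) := by
  intro f
  induction f with
  | zero => intro alo ahi blo bhi; rw [pvInord]; exact List.Pairwise.nil
  | succ f ih =>
    intro alo ahi blo bhi
    rw [pvInord]
    by_cases hk : (pvLM a b alo ahi blo bhi).2.2 = 0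
    · simp [hk]
    · rcases lm_bounds a b alo ahi blo bhi with h0 | hb
      · exact absurd (by rw [h0]) hk
      · simp only [if_neg hk]
        rw [List.pairwise_append]
        refine ⟨ih _ _ _ _, List.Pairwise.cons ?_ (ih _ _ _ _), ?_⟩
        · intro t ht
          have := inord_bounds a b f _ _ _ _ t ht; omega
        · intro s hs t ht
          have hsb := inord_bounds a b f _ _ _ _ s hs
          rcases List.mem_cons.mp ht with hblk | hR
          · subst hblk; omega
          · have := inord_bounds a b f _ _ _ _ t hR; omega

lemma pre_nil (a b : List Char) (f : Nat) (alo ahi blo bhi : Int)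
    (h : ahi ≤ alo ∨ bhi ≤ blo) : pvPre a b f alo ahi blo bhi = [] := by
  cases f with
  | zero => rw [pvPre]
  | succ f =>
    rw [pvPre]
    rw [lm_empty a b alo ahi blo bhi h]
    simp

-- ---------- the queue run collects exactly the pre-order blocks of its entries (valid windows)
def pvValid (a b : List Char) (r : Int × Int × Int × Int) : Prop :=
  0 ≤ r.1 ∧ r.2.1 ≤ (a.length : Int) ∧ 0 ≤ r.2.2.1 ∧ r.2.2.2 ≤ (b.length : Int)

def pvQCost (q : List (Int × Int × Int × Int)) : Nat :=
  (q.map (fun r => 2 * (r.2.1 - r.1).toNat + 1)).sum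

lemma queue_eq_pre (a b : List Char) : ∀ (fuel : Nat) (q : List (Int × Int × Int × Int))
    (acc : List (Int × Int × Int)),
    pvQCost q ≤ fuel → (∀ r ∈ q, pvValid a b r) →
    pvGmbQueue a b (pvB2j b) fuel q acc =
      acc ++ q.flatMap (fun r => pvPre a b ((r.2.1 - r.1).toNat + 1) r.1 r.2.1 r.2.2.1 r.2.2.2) := by
  intro fuel
  induction fuel using Nat.strong_induction_on with
  | _ fuel ih =>
    intro q acc hcost hval
    match q with
    | [] => cases fuel <;> simp [pvGmbQueue]
    | (alo, ahi, blo, bhi) :: rest =>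
      have hQ : pvQCost ((alo, ahi, blo, bhi) :: rest) =
          2 * (ahi - alo).toNat + 1 + pvQCost rest := by
        simp [pvQCost]
      rw [hQ] at hcost
      obtain ⟨fl, rfl⟩ : ∃ fl, fuel = fl + 1 := ⟨fuel - 1, by omega⟩
      have hvr : 0 ≤ alo ∧ ahi ≤ (a.length : Int) ∧ 0 ≤ blo ∧ bhi ≤ (b.length : Int) :=
        hval _ List.mem_cons_self
      obtain ⟨hv1, hv2, hv3, hv4⟩ := hvr
      have hflm : pvFlm a b (pvB2j b) alo ahi blo bhi = pvLM a b alo ahi blo bhi :=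
        flm_eq_lm a b alo ahi blo bhi hv3 hv4
      rw [pvGmbQueue]
      simp only [hflm]
      rw [List.flatMap_cons]
      by_cases hk : (pvLM a b alo ahi blo bhi).2.2 = 0
      · rw [if_neg (by simpa using hk)]
        rw [ih fl (by omega) rest acc (by omega)
          (fun r hr => hval r (List.mem_cons_of_mem _ hr))]
        rw [pvPre, if_pos hk]
        simp
      · rcases lm_bounds a b alo ahi blo bhi with h0 | hb
        · exact absurd (by rw [h0]) hk
        · rw [if_pos (by simpa using hk)]
          rw [pvPre, if_neg hk]
          by_cases g1 : alo < (pvLM a b alo ahi blo bhi).1 ∧ blo < (pvLM a b alo ahi blo bhi).2.1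
          · by_cases g2 : (pvLM a b alo ahi blo bhi).1 + (pvLM a b alo ahi blo bhi).2.2 < ahi ∧
                (pvLM a b alo ahi blo bhi).2.1 + (pvLM a b alo ahi blo bhi).2.2 < bhi
            · rw [if_pos g1, if_pos g2]
              rw [ih fl (by omega) _ _ (by
                  simp only [pvQCost, List.map_cons, List.sum_cons] at hcost ⊢
                  have h1 : ((pvLM a b alo ahi blo bhi).1 - alo).toNat +
                      (ahi - ((pvLM a b alo ahi blo bhi).1 + (pvLM a b alo ahi blo bhi).2.2)).toNat + 1
                      ≤ (ahi - alo).toNat := by omega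
                  omega)
                (by
                  intro r hr
                  rcases List.mem_cons.mp hr with rfl | hr1
                  · exact show 0 ≤ (pvLM a b alo ahi blo bhi).1 + (pvLM a b alo ahi blo bhi).2.2 ∧ ahi ≤ (a.length : Int) ∧ 0 ≤ (pvLM a b alo ahi blo bhi).2.1 + (pvLM a b alo ahi blo bhi).2.2 ∧ bhi ≤ (b.length : Int) from ⟨by omega, by omega, by omega, by omega⟩
                  rcases List.mem_cons.mp hr1 with rfl | hr2
                  · exact show 0 ≤ alo ∧ (pvLM a b alo ahi blo bhi).1 ≤ (a.length : Int) ∧ 0 ≤ blo ∧ (pvLM a b alo ahi blo bhi).2.1 ≤ (b.length : Int) from ⟨by omega, by omega, by omega, by omega⟩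
                  · exact hval r (List.mem_cons_of_mem _ hr2))]
              rw [List.flatMap_cons, List.flatMap_cons]
              rw [pre_fuel a b (ahi - alo).toNat
                  ((ahi - ((pvLM a b alo ahi blo bhi).1 + (pvLM a b alo ahi blo bhi).2.2)).toNat + 1)
                  ((pvLM a b alo ahi blo bhi).1 + (pvLM a b alo ahi blo bhi).2.2) ahi ((pvLM a b alo ahi blo bhi).2.1 + (pvLM a b alo ahi blo bhi).2.2) bhi (by omega) (by omega),
                pre_fuel a b (ahi - alo).toNat
                  (((pvLM a b alo ahi blo bhi).1 - alo).toNat + 1) alo (pvLM a b alo ahi blo bhi).1 blo (pvLM a b alo ahi blo bhi).2.1 (by omega) (by omega)]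
              simp [List.append_assoc]
            · rw [if_pos g1, if_neg g2]
              rw [ih fl (by omega) _ _ (by
                  simp only [pvQCost, List.map_cons, List.sum_cons] at hcost ⊢
                  omega)
                (by
                  intro r hr
                  rcases List.mem_cons.mp hr with rfl | hr1
                  · exact show 0 ≤ alo ∧ (pvLM a b alo ahi blo bhi).1 ≤ (a.length : Int) ∧ 0 ≤ blo ∧ (pvLM a b alo ahi blo bhi).2.1 ≤ (b.length : Int) from ⟨by omega, by omega, by omega, by omega⟩
                  · exact hval r (List.mem_cons_of_mem _ hr1))]
              rw [List.flatMap_cons]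
              have hnil : pvPre a b
                  ((ahi - ((pvLM a b alo ahi blo bhi).1 + (pvLM a b alo ahi blo bhi).2.2)).toNat + 1)
                  ((pvLM a b alo ahi blo bhi).1 + (pvLM a b alo ahi blo bhi).2.2) ahi
                  ((pvLM a b alo ahi blo bhi).2.1 + (pvLM a b alo ahi blo bhi).2.2) bhi = [] := by
                apply pre_nil; omega
              rw [pre_fuel a b (ahi - alo).toNat
                  ((ahi - ((pvLM a b alo ahi blo bhi).1 + (pvLM a b alo ahi blo bhi).2.2)).toNat + 1)
                  ((pvLM a b alo ahi blo bhi).1 + (pvLM a b alo ahi blo bhi).2.2) ahi ((pvLM a b alo ahi blo bhi).2.1 + (pvLM a b alo ahi blo bhi).2.2) bhi (by omega) (by omega),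
                pre_fuel a b (ahi - alo).toNat
                  (((pvLM a b alo ahi blo bhi).1 - alo).toNat + 1) alo (pvLM a b alo ahi blo bhi).1 blo (pvLM a b alo ahi blo bhi).2.1 (by omega) (by omega)]
              rw [hnil]
              simp [List.append_assoc]
          · by_cases g2 : (pvLM a b alo ahi blo bhi).1 + (pvLM a b alo ahi blo bhi).2.2 < ahi ∧
                (pvLM a b alo ahi blo bhi).2.1 + (pvLM a b alo ahi blo bhi).2.2 < bhi
            · rw [if_neg g1, if_pos g2]
              rw [ih fl (by omega) _ _ (by
                  simp only [pvQCost, List.map_cons, List.sum_cons] at hcost ⊢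
                  omega)
                (by
                  intro r hr
                  rcases List.mem_cons.mp hr with rfl | hr1
                  · exact show 0 ≤ (pvLM a b alo ahi blo bhi).1 + (pvLM a b alo ahi blo bhi).2.2 ∧ ahi ≤ (a.length : Int) ∧ 0 ≤ (pvLM a b alo ahi blo bhi).2.1 + (pvLM a b alo ahi blo bhi).2.2 ∧ bhi ≤ (b.length : Int) from ⟨by omega, by omega, by omega, by omega⟩
                  · exact hval r (List.mem_cons_of_mem _ hr1))]
              rw [List.flatMap_cons]
              have hnil : pvPre a b (((pvLM a b alo ahi blo bhi).1 - alo).toNat + 1)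
                  alo (pvLM a b alo ahi blo bhi).1 blo (pvLM a b alo ahi blo bhi).2.1 = [] := by
                apply pre_nil; omega
              rw [pre_fuel a b (ahi - alo).toNat
                  ((ahi - ((pvLM a b alo ahi blo bhi).1 + (pvLM a b alo ahi blo bhi).2.2)).toNat + 1)
                  ((pvLM a b alo ahi blo bhi).1 + (pvLM a b alo ahi blo bhi).2.2) ahi ((pvLM a b alo ahi blo bhi).2.1 + (pvLM a b alo ahi blo bhi).2.2) bhi (by omega) (by omega),
                pre_fuel a b (ahi - alo).toNat
                  (((pvLM a b alo ahi blo bhi).1 - alo).toNat + 1) alo (pvLM a b alo ahi blo bhi).1 blo (pvLM a b alo ahi blo bhi).2.1 (by omega) (by omega)]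
              rw [hnil]
              simp [List.append_assoc]
            · rw [if_neg g1, if_neg g2]
              rw [ih fl (by omega) _ _ (by omega)
                (fun r hr => hval r (List.mem_cons_of_mem _ hr))]
              have hnil1 : pvPre a b (((pvLM a b alo ahi blo bhi).1 - alo).toNat + 1)
                  alo (pvLM a b alo ahi blo bhi).1 blo (pvLM a b alo ahi blo bhi).2.1 = [] := by
                apply pre_nil; omega
              have hnil2 : pvPre a b
                  ((ahi - ((pvLM a b alo ahi blo bhi).1 + (pvLM a b alo ahi blo bhi).2.2)).toNat + 1)
                  ((pvLM a b alo ahi blo bhi).1 + (pvLM a b alo ahi blo bhi).2.2) ahi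
                  ((pvLM a b alo ahi blo bhi).2.1 + (pvLM a b alo ahi blo bhi).2.2) bhi = [] := by
                apply pre_nil; omega
              rw [pre_fuel a b (ahi - alo).toNat
                  ((ahi - ((pvLM a b alo ahi blo bhi).1 + (pvLM a b alo ahi blo bhi).2.2)).toNat + 1)
                  ((pvLM a b alo ahi blo bhi).1 + (pvLM a b alo ahi blo bhi).2.2) ahi ((pvLM a b alo ahi blo bhi).2.1 + (pvLM a b alo ahi blo bhi).2.2) bhi (by omega) (by omega),
                pre_fuel a b (ahi - alo).toNat
                  (((pvLM a b alo ahi blo bhi).1 - alo).toNat + 1) alo (pvLM a b alo ahi blo bhi).1 blo (pvLM a b alo ahi blo bhi).2.1 (by omega) (by omega)]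
              rw [hnil1, hnil2]
              simp [List.append_assoc]

lemma insertBy_congr {α : Type} (f g : α → α → Bool) (x : α) :
    ∀ (l : List α), (∀ y ∈ l, f x y = g x y) →
      PySem.List.insertBy f x l = PySem.List.insertBy g x l := by
  intro l
  induction l with
  | nil => intro _; rfl
  | cons y ys ih =>
    intro h
    rw [PySem.List.insertBy, PySem.List.insertBy, h y (List.mem_cons_self)]
    by_cases hxy : g x y = true
    · rw [if_pos hxy, if_pos hxy]
    · rw [if_neg hxy, if_neg hxy, ih (fun z hz => h z (List.mem_cons_of_mem _ hz))]

lemma foldl_insertBy_congr {α : Type} (f g : α → α → Bool) :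
    ∀ (xs acc : List α), (∀ x ∈ xs, ∀ y ∈ acc, f x y = g x y) →
      (∀ x ∈ xs, ∀ y ∈ xs, f x y = g x y) →
      xs.foldl (fun acc x => PySem.List.insertBy f x acc) acc =
        xs.foldl (fun acc x => PySem.List.insertBy g x acc) acc := by
  intro xs
  induction xs with
  | nil => intro acc _ _; rfl
  | cons x rest ih =>
    intro acc hacc hxs
    simp only [List.foldl_cons]
    rw [insertBy_congr f g x acc (hacc x (List.mem_cons_self))]
    apply ih
    · intro z hz y hy
      rcases (PySem.List.mem_insertBy g x y acc).mp hy with rfl | hy'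
      · exact hxs z (List.mem_cons_of_mem _ hz) y (List.mem_cons_self)
      · exact hacc z (List.mem_cons_of_mem _ hz) y hy'
    · intro z hz y hy
      exact hxs z (List.mem_cons_of_mem _ hz) y (List.mem_cons_of_mem _ hy)

-- ---------- sorting the pre-order blocks yields the in-order blocks
lemma sorted_pre_eq_inord (a b : List Char) (f : Nat) (alo ahi blo bhi : Int) :
    PySem.List.sorted2 (pvPre a b f alo ahi blo bhi) (fun t => t.1) (fun t => t.2.1) =
      pvInord a b f alo ahi blo bhi := by
  have hperm := pre_perm_inord a b f alo ahi blo bhi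
  have hpair := inord_pairwise a b f alo ahi blo bhi
  have hnd : ((pvInord a b f alo ahi blo bhi).map (fun t => t.1)).Nodup :=
    (List.pairwise_map.mpr hpair).imp (fun h => ne_of_lt h)
  have hinj : ∀ x ∈ pvPre a b f alo ahi blo bhi, ∀ y ∈ pvPre a b f alo ahi blo bhi,
      x.1 = y.1 → x = y := by
    intro x hx y hy hxy
    exact List.inj_on_of_nodup_map hnd (hperm.subset hx) (hperm.subset hy) hxy
  have hs2 : PySem.List.sorted2 (pvPre a b f alo ahi blo bhi) (fun t => t.1) (fun t => t.2.1) =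
      PySem.List.sorted (pvPre a b f alo ahi blo bhi) (fun t => t.1) := by
    have e1 : PySem.List.sorted2 (pvPre a b f alo ahi blo bhi) (fun t => t.1) (fun t => t.2.1) =
        (pvPre a b f alo ahi blo bhi).foldl (fun acc x => PySem.List.insertBy
          (fun u v : Int × Int × Int =>
            decide (u.1 < v.1) || (!decide (v.1 < u.1) && decide (u.2.1 < v.2.1))) x acc) [] := rfl
    have e2 : PySem.List.sorted (pvPre a b f alo ahi blo bhi) (fun t => t.1) =
        (pvPre a b f alo ahi blo bhi).foldl (fun acc x => PySem.List.insertBy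
          (fun u v : Int × Int × Int => decide (u.1 < v.1)) x acc) [] := rfl
    rw [e1, e2]
    apply foldl_insertBy_congr
    · intro x _ y hy; cases hy
    · intro x hx y hy
      by_cases hxy : x = y
      · subst hxy; simp
      · have h1 : x.1 ≠ y.1 := fun hh => hxy (hinj x hx y hy hh)
        by_cases hlt : x.1 < y.1
        · simp [hlt]
        · have hgt : y.1 < x.1 := by omega
          simp [hlt, hgt]
  rw [hs2]
  exact PySem.List.sorted_eq_of_perm_of_pairwise_lt _ _ _ hperm.symm hpair

-- ---------- rendering machinery: cursor emission, collapse invariance, recursion = emission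
def pvGap (t1 : List Char) (c e : Int) : List (List Char) :=
  if c < e then [pvWrap (PySem.List.slice t1 (some c) (some e))] else []

def pvEmitC (t1 : List Char) : Int → List (Int × Int × Int) → Int → List (List Char)
  | c, [], e => pvGap t1 c e
  | c, (_, jb, n) :: rest, e =>
    pvGap t1 c jb ++ [PySem.List.slice t1 (some jb) (some (jb + n))] ++ pvEmitC t1 (jb + n) rest e

-- B's emission per matching block with a cursor (functional form of A's rendering)
def pvEmitB (t1 : List Char) : Int → List (Int × Int × Int) → List (List Char)
  | _, [] => []
  | j, (_, jb, n) :: rest =>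
    pvGap t1 j jb ++ ([PySem.List.slice t1 (some jb) (some (jb + n))] ++ pvEmitB t1 (jb + n) rest)

def pvCollapseF : List (Int × Int × Int) → Int → Int → Int → List (Int × Int × Int)
  | [], i1, j1, k1 => if k1 ≠ 0 then [(i1, j1, k1)] else []
  | (i2, j2, k2) :: rest, i1, j1, k1 =>
    if i1 + k1 = i2 ∧ j1 + k1 = j2 then pvCollapseF rest i1 j1 (k1 + k2)
    else if k1 ≠ 0 then (i1, j1, k1) :: pvCollapseF rest i2 j2 k2
    else pvCollapseF rest i2 j2 k2

def pvChain (c e : Int) : List (Int × Int × Int) → Prop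
  | [] => c ≤ e
  | (_, jb, n) :: rest => c ≤ jb ∧ 1 ≤ n ∧ pvChain (jb + n) e rest

lemma pvSlice_self (t : List Char) (x : Int) : PySem.List.slice t (some x) (some x) = [] := by
  have h := PySem.List.length_slice t x x
  simpa using h

lemma slice_append_slice (t : List Char) (x y z : Int) (h0 : 0 ≤ x) (hxy : x ≤ y) (hyz : y ≤ z) :
    PySem.List.slice t (some x) (some y) ++ PySem.List.slice t (some y) (some z) =
      PySem.List.slice t (some x) (some z) := by
  have hx : (0 : Int) ≤ y := le_trans h0 hxy
  rw [PySem.List.slice_toNat t h0 (by omega), PySem.List.slice_toNat t hx (by omega),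
    PySem.List.slice_toNat t h0 (by omega)]
  have e1 : z.toNat - x.toNat = (y.toNat - x.toNat) + (z.toNat - y.toNat) := by omega
  rw [e1, List.take_add]
  congr 2
  rw [List.drop_drop]
  congr 1
  omega

-- per matching block, A's opcode rendering emits exactly the gap-then-block pieces, whatever
-- the cursors are ('replace' and 'insert' render identically, 'delete' renders nothing)
lemma render_eq_emit (t1 : List Char) (blocks : List (Int × Int × Int)) :
    ∀ i j : Int, (pvRenderA t1 (pvOpcodes i j blocks)).flatten = (pvEmitB t1 j blocks).flatten := by
  induction blocks with
  | nil => intro i j; simp [pvOpcodes, pvRenderA, pvEmitB]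
  | cons blk rest ih =>
    intro i j
    obtain ⟨ai, bj, size⟩ := blk
    by_cases hj : j < bj
    · by_cases hi : i < ai
      · by_cases hs : size = 0 <;>
          simp [pvOpcodes, pvRenderA, pvEmitB, pvGap, hi, hj, hs, ih, pvSlice_self]
      · by_cases hs : size = 0 <;>
          simp [pvOpcodes, pvRenderA, pvEmitB, pvGap, hi, hj, hs, ih, pvSlice_self]
    · by_cases hi : i < ai
      · by_cases hs : size = 0 <;>
          simp [pvOpcodes, pvRenderA, pvEmitB, pvGap, hi, hj, hs, ih, pvSlice_self]
      · by_cases hs : size = 0 <;>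
          simp [pvOpcodes, pvRenderA, pvEmitB, pvGap, hi, hj, hs, ih, pvSlice_self]

lemma emitB_sentinel (t1 : List Char) (bs : List (Int × Int × Int)) (la lb : Int) :
    ∀ c, (pvEmitB t1 c (bs ++ [(la, lb, 0)])).flatten = (pvEmitC t1 c bs lb).flatten := by
  induction bs with
  | nil => intro c; simp [pvEmitB, pvEmitC, pvSlice_self]
  | cons blk rest ih =>
    intro c
    obtain ⟨ai, jb, n⟩ := blk
    simp [pvEmitB, pvEmitC, ih]

lemma collapse_acc : ∀ (bs : List (Int × Int × Int)) (i1 j1 k1 : Int) (acc : List (Int × Int × Int)),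
    pvCollapse bs i1 j1 k1 acc = acc ++ pvCollapseF bs i1 j1 k1 := by
  intro bs
  induction bs with
  | nil => intro i1 j1 k1 acc; by_cases h : k1 ≠ 0 <;> simp [pvCollapse, pvCollapseF, h]
  | cons blk rest ih =>
    intro i1 j1 k1 acc
    obtain ⟨i2, j2, k2⟩ := blk
    by_cases h1 : i1 + k1 = i2 ∧ j1 + k1 = j2
    · simp [pvCollapse, pvCollapseF, h1, ih]
    · by_cases h2 : k1 ≠ 0 <;> simp [pvCollapse, pvCollapseF, h1, h2, ih]

lemma emitC_collapseF (t1 : List Char) : ∀ (bs : List (Int × Int × Int)) (i1 j1 k1 c e : Int),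
    0 ≤ c → c ≤ j1 → 1 ≤ k1 → pvChain (j1 + k1) e bs →
    (pvEmitC t1 c (pvCollapseF bs i1 j1 k1) e).flatten =
      (pvEmitC t1 c ((i1, j1, k1) :: bs) e).flatten := by
  intro bs
  induction bs with
  | nil =>
    intro i1 j1 k1 c e _ _ hk _
    rw [pvCollapseF, if_pos (by omega : k1 ≠ 0)]
  | cons blk rest ih =>
    intro i1 j1 k1 c e hc hcj hk hch
    obtain ⟨i2, j2, k2⟩ := blk
    obtain ⟨hj12, hk2, hch'⟩ := hch
    by_cases hm : i1 + k1 = i2 ∧ j1 + k1 = j2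
    · rw [pvCollapseF, if_pos hm]
      rw [ih i1 j1 (k1 + k2) c e hc hcj (by omega)
        (by rw [show j1 + (k1 + k2) = j2 + k2 by omega]; exact hch')]
      show (pvGap t1 c j1 ++ [PySem.List.slice t1 (some j1) (some (j1 + (k1 + k2)))] ++
          pvEmitC t1 (j1 + (k1 + k2)) rest e).flatten =
        (pvGap t1 c j1 ++ [PySem.List.slice t1 (some j1) (some (j1 + k1))] ++
          (pvGap t1 (j1 + k1) j2 ++ [PySem.List.slice t1 (some j2) (some (j2 + k2))] ++
            pvEmitC t1 (j2 + k2) rest e)).flatten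
      have hgap : pvGap t1 (j1 + k1) j2 = [] := by
        unfold pvGap; rw [if_neg (by omega)]
      have hsl : PySem.List.slice t1 (some j1) (some (j1 + k1)) ++
          PySem.List.slice t1 (some (j1 + k1)) (some (j1 + (k1 + k2))) =
          PySem.List.slice t1 (some j1) (some (j1 + (k1 + k2))) :=
        slice_append_slice t1 _ _ _ (by omega) (by omega) (by omega)
      rw [hgap]
      simp only [List.flatten_append, List.flatten_cons, List.flatten_nil, List.nil_append,
        List.append_nil, ← hsl]
      rw [show j1 + (k1 + k2) = j2 + k2 by omega, ← hm.2]
      simp [List.append_assoc]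
    · rw [pvCollapseF, if_neg hm, if_pos (by omega : k1 ≠ 0)]
      show (pvGap t1 c j1 ++ [PySem.List.slice t1 (some j1) (some (j1 + k1))] ++
          pvEmitC t1 (j1 + k1) (pvCollapseF rest i2 j2 k2) e).flatten =
        (pvGap t1 c j1 ++ [PySem.List.slice t1 (some j1) (some (j1 + k1))] ++
          pvEmitC t1 (j1 + k1) ((i2, j2, k2) :: rest) e).flatten
      simp only [List.flatten_append]
      rw [ih i2 j2 k2 (j1 + k1) e (by omega) hj12 (by omega) hch']

lemma emitC_collapse0 (t1 : List Char) (bs : List (Int × Int × Int)) (e : Int)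
    (hch : pvChain 0 e bs) :
    (pvEmitC t1 0 (pvCollapseF bs 0 0 0) e).flatten = (pvEmitC t1 0 bs e).flatten := by
  cases bs with
  | nil => rw [pvCollapseF, if_neg (by omega : ¬ (0:Int) ≠ 0)]
  | cons blk rest =>
    obtain ⟨i2, j2, k2⟩ := blk
    obtain ⟨hj2, hk2, hch'⟩ := hch
    by_cases hm : (0:Int) + 0 = i2 ∧ (0:Int) + 0 = j2
    · rw [pvCollapseF, if_pos hm]
      rw [emitC_collapseF t1 rest 0 0 (0 + k2) 0 e le_rfl le_rfl (by omega)
        (by rw [show (0:Int) + (0 + k2) = j2 + k2 by omega]; exact hch')]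
      show (pvGap t1 0 0 ++ [PySem.List.slice t1 (some 0) (some (0 + (0 + k2)))] ++
          pvEmitC t1 (0 + (0 + k2)) rest e).flatten =
        (pvGap t1 0 j2 ++ [PySem.List.slice t1 (some j2) (some (j2 + k2))] ++
          pvEmitC t1 (j2 + k2) rest e).flatten
      rw [show (0 : Int) + (0 + k2) = j2 + k2 by omega, show (some (0:Int)) = some j2 by rw [← hm.2]; norm_num]
      have : pvGap t1 0 0 = pvGap t1 0 j2 := by rw [← hm.2]; norm_num
      rw [this]
    · rw [pvCollapseF, if_neg hm, if_neg (by omega : ¬ (0:Int) ≠ 0)]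
      exact emitC_collapseF t1 rest i2 j2 k2 0 e le_rfl hj2 (by omega) hch'

lemma chain_append : ∀ (bs1 : List (Int × Int × Int)) (c j i k e : Int)
    (bs2 : List (Int × Int × Int)),
    pvChain c j bs1 → 1 ≤ k → pvChain (j + k) e bs2 → pvChain c e (bs1 ++ (i, j, k) :: bs2) := by
  intro bs1
  induction bs1 with
  | nil => intro c j i k e bs2 h1 hk h2; exact ⟨h1, hk, h2⟩
  | cons blk rest ih =>
    intro c j i k e bs2 h1 hk h2
    obtain ⟨ai, jb, n⟩ := blk
    exact ⟨h1.1, h1.2.1, ih _ _ _ _ _ _ h1.2.2 hk h2⟩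

lemma inord_chain (a b : List Char) : ∀ (f : Nat) (alo ahi blo bhi : Int), blo ≤ bhi →
    pvChain blo bhi (pvInord a b f alo ahi blo bhi) := by
  intro f
  induction f with
  | zero => intro alo ahi blo bhi h; rw [pvInord]; exact h
  | succ f ih =>
    intro alo ahi blo bhi h
    rw [pvInord]
    by_cases hk : (pvLM a b alo ahi blo bhi).2.2 = 0
    · simp only [if_pos hk]; exact h
    · rcases lm_bounds a b alo ahi blo bhi with h0 | hb
      · exact absurd (by rw [h0]) hk
      · simp only [if_neg hk]
        exact chain_append _ _ _ _ _ _ _ (ih _ _ _ _ (by omega)) (by omega)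
          (ih _ _ _ _ (by omega))

lemma emitC_split (t1 : List Char) : ∀ (bs1 : List (Int × Int × Int)) (i j k : Int)
    (bs2 : List (Int × Int × Int)) (c e : Int),
    (pvEmitC t1 c (bs1 ++ (i, j, k) :: bs2) e).flatten =
      (pvEmitC t1 c bs1 j).flatten ++ PySem.List.slice t1 (some j) (some (j + k)) ++
        (pvEmitC t1 (j + k) bs2 e).flatten := by
  intro bs1
  induction bs1 with
  | nil => intro i j k bs2 c e; simp [pvEmitC]
  | cons blk rest ih =>
    intro i j k bs2 c e
    obtain ⟨ai, jb, n⟩ := blk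
    simp [pvEmitC, ih]

-- B's recursion renders exactly the cursor emission of the in-order blocks
lemma renderB_acc (a b : List Char) : ∀ (f : Nat) (alo ahi blo bhi : Int)
    (parts : List (List Char)),
    pvRenderB a b f alo ahi blo bhi parts = parts ++ pvRenderB a b f alo ahi blo bhi [] := by
  intro f
  induction f with
  | zero => intro alo ahi blo bhi parts; simp [pvRenderB]
  | succ f ih =>
    intro alo ahi blo bhi parts
    rw [pvRenderB, pvRenderB]
    by_cases hk : (pvLM a b alo ahi blo bhi).2.2 = 0
    · by_cases hg : blo < bhi <;> simp [hk, hg]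
    · simp only [if_neg hk]
      rw [ih _ _ _ _ (pvRenderB a b f alo _ blo _ parts ++ _),
        ih _ _ _ _ (pvRenderB a b f alo _ blo _ [] ++ _), ih _ _ _ _ parts]
      simp

lemma renderB_eq_emitC (a b : List Char) : ∀ (f : Nat) (alo ahi blo bhi : Int),
    (ahi - alo).toNat < f →
    (pvRenderB a b f alo ahi blo bhi []).flatten =
      (pvEmitC b blo (pvInord a b f alo ahi blo bhi) bhi).flatten := by
  intro f
  induction f with
  | zero => intro alo ahi blo bhi hf; exact absurd hf (Nat.not_lt_zero _)
  | succ f ih =>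
    intro alo ahi blo bhi hf
    rw [pvRenderB, pvInord]
    by_cases hk : (pvLM a b alo ahi blo bhi).2.2 = 0
    · simp only [if_pos hk]
      show (if blo < bhi then ([] : List (List Char)) ++ [pvWrap (PySem.List.slice b (some blo) (some bhi))] else []).flatten = _
      unfold pvEmitC pvGap
      by_cases hg : blo < bhi <;> simp [hg]
    · rcases lm_bounds a b alo ahi blo bhi with h0 | hb
      · exact absurd (by rw [h0]) hk
      · simp only [if_neg hk]
        rw [renderB_acc a b f ((pvLM a b alo ahi blo bhi).1 + (pvLM a b alo ahi blo bhi).2.2) ahi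
            ((pvLM a b alo ahi blo bhi).2.1 + (pvLM a b alo ahi blo bhi).2.2) bhi _]
        rw [emitC_split b (pvInord a b f alo (pvLM a b alo ahi blo bhi).1 blo
            (pvLM a b alo ahi blo bhi).2.1) _ _ _ _ blo bhi]
        simp only [List.flatten_append, List.flatten_cons, List.flatten_nil, List.append_nil]
        rw [ih alo (pvLM a b alo ahi blo bhi).1 blo (pvLM a b alo ahi blo bhi).2.1 (by omega),
          ih ((pvLM a b alo ahi blo bhi).1 + (pvLM a b alo ahi blo bhi).2.2) ahi
            ((pvLM a b alo ahi blo bhi).2.1 + (pvLM a b alo ahi blo bhi).2.2) bhi (by omega)]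

-- ===== VERDICT (by name: the statement is the Claim_ definition above) =====
theorem get_highlighted_diff_spec : Claim_equal_get_highlighted_diff := by
  intro text1 text2 _
  show get_highlighted_diff text1 text2 = get_highlighted_diff_alt text1 text2
  unfold get_highlighted_diff get_highlighted_diff_alt
  apply congrArg String.ofList
  generalize text2.toList = A
  generalize text1.toList = B
  have hq : pvGmbQueue A B (pvB2j B) (2 * A.length + 2)
      [((0 : Int), (A.length : Int), (0 : Int), (B.length : Int))] [] =
      pvPre A B (A.length + 1) 0 (A.length : Int) 0 (B.length : Int) := by
    rw [queue_eq_pre A B (2 * A.length + 2) _ []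
      (by simp [pvQCost])
      (by
        intro r hr
        rcases List.mem_cons.mp hr with rfl | h
        · exact show (0 : Int) ≤ 0 ∧ (A.length : Int) ≤ (A.length : Int) ∧
            (0 : Int) ≤ 0 ∧ (B.length : Int) ≤ (B.length : Int) from
            ⟨le_rfl, le_rfl, le_rfl, le_rfl⟩
        · cases h)]
    simp
  have hmb : pvMatchingBlocks A B = pvCollapse
      (PySem.List.sorted2 (pvGmbQueue A B (pvB2j B) (2 * A.length + 2)
        [((0 : Int), (A.length : Int), (0 : Int), (B.length : Int))] [])
        (fun t => t.1) (fun t => t.2.1)) 0 0 0 []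
      ++ [((A.length : Int), (B.length : Int), 0)] := rfl
  rw [hmb, hq, sorted_pre_eq_inord, collapse_acc, List.nil_append]
  rw [render_eq_emit, emitB_sentinel]
  rw [emitC_collapse0 B _ _ (inord_chain A B (A.length + 1) 0 (A.length : Int) 0
    (B.length : Int) (by positivity))]
  rw [← renderB_eq_emitC A B (A.length + 1) 0 (A.length : Int) 0 (B.length : Int) (by omega)]
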